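-- pv_equiv track=rewrite | github.com/slcloe/Algorithm-Study | 8주차/250134/0408_최지희.py | solution
-- ===== SOURCE A (Python) =====
-- import copy
-- from collections import deque
--
-- def solution(maze):
--   def to_int(x,y):
--     return x*m+y
--   def to_tuple(x):
--     return x//m,x%m
--   n=len(maze)
--   m=len(maze[0])
--   flags=[0]*6
--   for i in range(n):
--     for j in range(m):
--       flags[maze[i][j]]=i*m+j
--   dx=[-1,0,1,0]
--   dy=[0,1,0,-1]
--   q=deque([(0,flags[1],flags[2],{flags[1]},{flags[2]})]) # 이동칸, 빨간수레위치, 파란수레위치, 빨간수레방문기록, 파란수레방문기록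
--   while q:
--     cnt,red,blue,rvisited,bvisited=q.popleft()
--     if red==flags[3] and blue==flags[4]:
--       return cnt
--     rx,ry=to_tuple(red)
--     bx,by=to_tuple(blue)
--     for i in range(4): # 16가지 경우
--       if red==flags[3]: # 도착지면 이동 안함
--         nrx=rx
--         nry=ry
--       else:
--         nrx=rx+dx[i]
--         nry=ry+dy[i]
--         if to_int(nrx,nry) in rvisited: # 방문한 칸
--           continue
--         if nrx<0 or nrx>=n or nry<0 or nry>=m: # 격자 밖
--           continue
--         if maze[nrx][nry]==5: # 벽
--           continue
--       rvisited.add(to_int(nrx,nry))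
--       for j in range(4): # 빨간수레는 최소한의 조건만 체크하고 파란수레까지 이동하고 나서 전체 조건을 체크
--         if blue==flags[4]: # 도착지면 이동 안함
--           if to_int(nrx,nry)==blue: # 파란수레가 이미 도착 -> 움직이지 않음 -> 빨간 수레 못감
--             continue
--           nbx=bx
--           nby=by
--         else:
--           nbx=bx+dx[j]
--           nby=by+dy[j]
--           if to_int(nrx,nry)==blue and to_int(nbx,nby)==red: # 자리를 바꾸며 움직일 수 없음
--             continue
--           if to_int(nbx,nby)==to_int(nrx,nry): # 같은 칸으로 움직일 수 없음
--             continue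
--           if to_int(nbx,nby) in bvisited: # 방문한 칸
--             continue
--           if nbx<0 or nbx>=n or nby<0 or nby>=m: # 격자 밖
--             continue
--           if maze[nbx][nby]==5: # 벽
--             continue
--         bvisited.add(to_int(nbx,nby))
--         q.append((cnt+1,to_int(nrx,nry),to_int(nbx,nby),copy.deepcopy(rvisited),copy.deepcopy(bvisited)))
--         bvisited.remove(to_int(nbx,nby))
--       rvisited.remove(to_int(nrx,nry))
--   return 0
-- ===== SOURCE B (Python) =====
-- def solution(maze):
--   # Recursive branch-and-bound DFS over two-cart states; each cart's candidate
--   # moves are generated by one shared `targets` helper (freeze on destination,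
--   # else the in-bounds, non-wall, unvisited neighbours), then pair-filtered.
--   n = len(maze)
--   m = len(maze[0])
--   flags = [0] * 6
--   for i in range(n):
--     for j in range(m):
--       flags[maze[i][j]] = i * m + j
--   start_r, start_b, goal_r, goal_b = flags[1], flags[2], flags[3], flags[4]
--
--   def targets(pos, goal, visited):
--     if pos == goal:
--       return [pos]
--     x, y = divmod(pos, m)
--     return [nx * m + ny
--             for nx, ny in ((x - 1, y), (x, y + 1), (x + 1, y), (x, y - 1))
--             if 0 <= nx < n and 0 <= ny < m
--             and maze[nx][ny] != 5 and nx * m + ny not in visited]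
--
--   best = None
--
--   def dfs(red, blue, rv, bv, cnt):
--     nonlocal best
--     if best is not None and best <= cnt:
--       return
--     if red == goal_r and blue == goal_b:
--       best = cnt
--       return
--     for nr in targets(red, goal_r, rv):
--       for nb in targets(blue, goal_b, bv):
--         if nb == nr:
--           continue
--         if nr == blue and (blue == goal_b or nb == red):
--           continue
--         dfs(nr, nb, rv | {nr}, bv | {nb}, cnt + 1)
--
--   dfs(start_r, start_b, {start_r}, {start_b}, 0)
--   return 0 if best is None else best
-- ===== Notes on version B (the rewrite author's own statement) =====
-- stated objective: alternative
-- what changed: Replaces A's deque BFS over (count, positions, deep-copied visited sets) with a recursive branch-and-bound DFS whose move generation is restructured into one shared per-cart `targets` helper (destination-freeze, else the in-bounds non-wall unvisited neighbours, deduplicated) followed by pair filters for swap/same-cell, threading a running minimum down the recursion and returning it (0 if unreachable); the DFS minimum equals the BFS first-reach depth because every step strictly enlarges a visited set.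
import Mathlib
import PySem

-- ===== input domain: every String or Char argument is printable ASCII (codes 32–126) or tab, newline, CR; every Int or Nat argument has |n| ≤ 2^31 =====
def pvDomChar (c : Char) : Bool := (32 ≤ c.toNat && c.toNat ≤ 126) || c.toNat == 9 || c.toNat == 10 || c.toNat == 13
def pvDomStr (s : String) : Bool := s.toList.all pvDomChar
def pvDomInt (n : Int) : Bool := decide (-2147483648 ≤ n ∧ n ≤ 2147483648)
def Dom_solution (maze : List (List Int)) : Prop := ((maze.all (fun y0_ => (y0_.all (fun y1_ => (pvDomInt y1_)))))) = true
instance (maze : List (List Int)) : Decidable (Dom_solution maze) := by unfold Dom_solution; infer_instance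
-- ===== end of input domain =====

-- B replaces A's deque BFS (+ deepcopy of the visited sets) by a recursive
-- branch-and-bound DFS whose moves come from one shared per-cart `targets`
-- helper plus pair filters; threading a running minimum yields the same value.

-- ===== PORT A =====
-- BFS loop of A; the deque is a list popped at the head.  The fuel argument
-- only makes the recursion structurally terminating; under Pre_solution it is
-- proved never to run out (`pvBridge` is applied with fuel ≥ Φ + 1).
def solutionGo (maze : List (List Int)) (n m f3 f4 : Int) :
    Nat → List (Int × Int × Int × List Int × List Int) → Int
  | 0, _ => 0
  | _ + 1, [] => 0
  | fuel + 1, (cnt, red, blue, rvis, bvis) :: rest =>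
    if red = f3 ∧ blue = f4 then cnt
    else
      let rx := PySem.Int.floordiv red m
      let ry := PySem.Int.mod red m
      let bx := PySem.Int.floordiv blue m
      let by_ := PySem.Int.mod blue m
      let dx : List Int := [-1, 0, 1, 0]
      let dy : List Int := [0, 1, 0, -1]
      let st := (PySem.List.pyRange 0 4 1).foldl
        (fun (st : List (Int × Int × Int × List Int × List Int) × List Int × List Int) i =>
          let q := st.1
          let rv := st.2.1
          let bv := st.2.2
          -- body shared by the 'red on destination' and 'red moves' branches
          let inner := fun (nrx nry : Int) =>
            let nr := nrx * m + nry
            let rv1 := PySem.Set.add rv nr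
            let st2 := (PySem.List.pyRange 0 4 1).foldl
              (fun (p : List (Int × Int × Int × List Int × List Int) × List Int) j =>
                let q2 := p.1
                let bv2 := p.2
                let push := fun (nbx nby : Int) =>
                  let nb := nbx * m + nby
                  let bv3 := PySem.Set.add bv2 nb
                  let q3 := q2 ++ [(cnt + 1, nr, nb, rv1, bv3)]
                  -- Python set.remove: the element is always present here
                  let bv4 := (PySem.Set.remove? bv3 nb).getD bv3
                  (q3, bv4)
                if blue = f4 then
                  (if nr = blue then p else push bx by_)
                else
                  let nbx := bx + PySem.List.pyGetD dx j 0
                  let nby := by_ + PySem.List.pyGetD dy j 0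
                  if nr = blue ∧ nbx * m + nby = red then p
                  else if nbx * m + nby = nr then p
                  else if PySem.Set.contains bv2 (nbx * m + nby) then p
                  else if nbx < 0 ∨ nbx ≥ n ∨ nby < 0 ∨ nby ≥ m then p
                  else if PySem.List.pyGetD (PySem.List.pyGetD maze nbx []) nby 0 = 5 then p
                  else push nbx nby)
              (q, bv)
            let rv2 := (PySem.Set.remove? rv1 nr).getD rv1
            (st2.1, rv2, st2.2)
          if red = f3 then inner rx ry
          else
            let nrx := rx + PySem.List.pyGetD dx i 0
            let nry := ry + PySem.List.pyGetD dy i 0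
            if PySem.Set.contains rv (nrx * m + nry) then st
            else if nrx < 0 ∨ nrx ≥ n ∨ nry < 0 ∨ nry ≥ m then st
            else if PySem.List.pyGetD (PySem.List.pyGetD maze nrx []) nry 0 = 5 then st
            else inner nrx nry)
        (rest, rvis, bvis)
      solutionGo maze n m f3 f4 fuel st.1

-- flags: six cells, written by Python list assignment (pySetD: negative index
-- wraps; out-of-range writes raise in Python and are excluded by Pre_solution)
def solutionFlags (maze : List (List Int)) (n m : Int) : List Int :=
  (PySem.List.pyRange 0 n 1).foldl (fun fl i =>
      (PySem.List.pyRange 0 m 1).foldl (fun fl2 j =>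
        PySem.List.pySetD fl2 (PySem.List.pyGetD (PySem.List.pyGetD maze i []) j 0) (i * m + j)) fl)
    [0, 0, 0, 0, 0, 0]

def solution (maze : List (List Int)) : Int :=
  let n : Int := maze.length
  let m : Int := ((PySem.List.pyGetD maze 0 []).length : Int)  -- maze[0]; [] excluded by Pre_solution
  let flags := solutionFlags maze n m
  let f1 := PySem.List.pyGetD flags 1 0
  let f2 := PySem.List.pyGetD flags 2 0
  let f3 := PySem.List.pyGetD flags 3 0
  let f4 := PySem.List.pyGetD flags 4 0
  solutionGo maze n m f3 f4 (17 ^ (2 * maze.length * (PySem.List.pyGetD maze 0 []).length + 8))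
    [(0, f1, f2, [f1], [f2])]

-- ===== PORT B =====
-- candidate next cells of one cart (Source B's `targets`): frozen on its
-- destination, else the in-bounds, non-wall, unvisited neighbours
def solutionAltTargets (maze : List (List Int)) (n m pos goal : Int) (visited : List Int) : List Int :=
  if pos = goal then [pos]
  else
    let x := PySem.Int.floordiv pos m
    let y := PySem.Int.mod pos m
    (([(x - 1, y), (x, y + 1), (x + 1, y), (x, y - 1)] : List (Int × Int)).filter
      (fun p => decide (0 ≤ p.1) && decide (p.1 < n) && decide (0 ≤ p.2) && decide (p.2 < m)
        && !decide (PySem.List.pyGetD (PySem.List.pyGetD maze p.1 []) p.2 0 = 5)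
        && !PySem.Set.contains visited (p.1 * m + p.2))).map
      (fun p => p.1 * m + p.2)

-- DFS of Source B threading the running minimum `best`; fuel only for structural
-- termination (proved ample under Pre_solution)
def solutionAltGo (maze : List (List Int)) (n m f3 f4 : Int) :
    Nat → Int → Int → List Int → List Int → Int → Option Int → Option Int
  | 0, _, _, _, _, _, best => best
  | fuel + 1, red, blue, rv, bv, cnt, best =>
    if (match best with | some v => decide (v ≤ cnt) | none => false) = true then best
    else if red = f3 ∧ blue = f4 then some cnt
    else
      (solutionAltTargets maze n m red f3 rv).foldl (fun best1 nr =>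
        (solutionAltTargets maze n m blue f4 bv).foldl (fun best2 nb =>
          if nb = nr then best2
          else if nr = blue ∧ (blue = f4 ∨ nb = red) then best2
          else solutionAltGo maze n m f3 f4 fuel nr nb
            (PySem.Set.union rv [nr]) (PySem.Set.union bv [nb]) (cnt + 1) best2) best1) best

def solution_alt (maze : List (List Int)) : Int :=
  let n : Int := maze.length
  let m : Int := ((PySem.List.pyGetD maze 0 []).length : Int)
  let flags := solutionFlags maze n m
  let sr := PySem.List.pyGetD flags 1 0
  let sb := PySem.List.pyGetD flags 2 0
  let gr := PySem.List.pyGetD flags 3 0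
  let gb := PySem.List.pyGetD flags 4 0
  (solutionAltGo maze n m gr gb (2 * maze.length * (PySem.List.pyGetD maze 0 []).length + 8)
    sr sb [sr] [sb] 0 none).getD 0

-- ===== PRECONDITION & SPEC =====
-- Pre_solution: exactly the inputs where Python A returns normally: a nonempty
-- maze whose rows all have at least len(maze[0]) entries, the first len(maze[0])
-- entries of each row lying in [-6, 5] (anything else raises IndexError at
-- `flags[maze[i][j]] = ...` or `maze[i][j]`).
def Pre_solution (maze : List (List Int)) : Prop :=
  maze ≠ [] ∧ ∀ row ∈ maze,
    (maze.headD []).length ≤ row.length ∧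
    ∀ v ∈ row.take (maze.headD []).length, -6 ≤ v ∧ v ≤ 5
instance (maze : List (List Int)) : Decidable (Pre_solution maze) := by
  unfold Pre_solution; infer_instance
def pvWitness_solution : List (List Int) := [[1, 2], [3, 4]]

def Spec_solution (maze : List (List Int)) (out : Int) : Prop := out = solution_alt maze
instance (maze : List (List Int)) (out : Int) : Decidable (Spec_solution maze out) := by
  unfold Spec_solution; infer_instance

-- ===== CLAIM (what is proved, stated in full; the proofs are below) =====
def Claim_equal_solution : Prop :=
  ∀ (maze : List (List Int)), Dom_solution maze → Pre_solution maze →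
    Spec_solution maze (solution maze)

-- ===== LEMMAS AND PROOFS =====

-- ---------- generic loop-shape machinery ----------

def pvEmit {σ β : Type} (f : σ → Int → List β × σ) : σ → List Int → List β
  | _, [] => []
  | s, a :: l => (f s a).1 ++ pvEmit f (f s a).2 l

def pvFin {σ β : Type} (f : σ → Int → List β × σ) : σ → List Int → σ
  | s, [] => s
  | s, a :: l => pvFin f (f s a).2 l

theorem pvFoldl_shape {σ β γ : Type} (F : List γ × σ → Int → List γ × σ)
    (f : σ → Int → List β × σ) (g : β → γ)
    (H : ∀ q s a, F (q, s) a = (q ++ ((f s a).1).map g, (f s a).2)) :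
    ∀ (l : List Int) (q0 : List γ) (s0 : σ),
      l.foldl F (q0, s0) = (q0 ++ (pvEmit f s0 l).map g, pvFin f s0 l) := by
  intro l
  induction l with
  | nil => intro q0 s0; simp [pvEmit, pvFin]
  | cons a l ih =>
    intro q0 s0
    simp only [List.foldl_cons, H, pvEmit, pvFin, ih, List.map_append, List.append_assoc]

theorem pvFoldl_flat {γ β : Type} (F : γ → Int → γ) (h : Int → List β) (g : γ → β → γ)
    (H : ∀ b a, F b a = (h a).foldl g b) :
    ∀ (l : List Int) (b : γ), l.foldl F b = (l.flatMap h).foldl g b := by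
  intro l
  induction l with
  | nil => intro b; rfl
  | cons a l ih => intro b; simp only [List.foldl_cons, H, List.flatMap_cons, List.foldl_append, ih]

theorem pvForall2_append {β β' : Type} {R : β → β' → Prop} {a c : List β} {b d : List β'}
    (h1 : List.Forall₂ R a b) (h2 : List.Forall₂ R c d) : List.Forall₂ R (a ++ c) (b ++ d) := by
  induction h1 with
  | nil => simpa
  | cons hx _ ih => exact List.Forall₂.cons hx ih

theorem pvFlatMap_length_le {β : Type} (h : Int → List β) (k : Nat) :
    ∀ (l : List Int), (∀ a ∈ l, (h a).length ≤ k) →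
      (l.flatMap h).length ≤ l.length * k := by
  intro l
  induction l with
  | nil => simp
  | cons a l ih =>
    intro H
    simp only [List.flatMap_cons, List.length_append, List.length_cons]
    have := ih (fun b hb => H b (by simp [hb]))
    have ha := H a (by simp)
    calc (h a).length + (l.flatMap h).length ≤ k + l.length * k := by omega
      _ = (l.length + 1) * k := by ring

-- ---------- option minimum ----------

def pvOmin : Option Int → Option Int → Option Int
  | none, b => b
  | some v, none => some v
  | some v, some w => some (min v w)

def pvMfold (b : Option Int) (l : List Int) : Option Int :=
  l.foldl (fun b x => some (match b with | none => x | some v => min v x)) b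

theorem pvOmin_none_right (a : Option Int) : pvOmin a none = a := by
  cases a <;> rfl

theorem pvOmin_assoc (a b c : Option Int) : pvOmin (pvOmin a b) c = pvOmin a (pvOmin b c) := by
  cases a <;> cases b <;> cases c <;> simp [pvOmin, min_assoc]

theorem pvMfold_cons (b : Option Int) (x : Int) (l : List Int) :
    pvMfold b (x :: l) = pvMfold (pvOmin b (some x)) l := by
  cases b <;> rfl

theorem pvMfold_eq_omin (l : List Int) : ∀ b, pvMfold b l = pvOmin b (pvMfold none l) := by
  induction l with
  | nil => intro b; simp [pvMfold, pvOmin_none_right]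
  | cons x l ih =>
    intro b
    rw [pvMfold_cons, ih, pvMfold_cons none, ih (pvOmin none (some x))]
    rw [← pvOmin_assoc]
    rfl

theorem pvMfold_append (l1 l2 : List Int) :
    pvMfold none (l1 ++ l2) = pvOmin (pvMfold none l1) (pvMfold none l2) := by
  simp only [pvMfold, List.foldl_append]
  exact pvMfold_eq_omin l2 _

theorem pvMfold_mem (l : List Int) : ∀ b w, pvMfold b l = some w → b = some w ∨ w ∈ l := by
  induction l with
  | nil => intro b w h; exact Or.inl h
  | cons x l ih =>
    intro b w h
    rw [pvMfold_cons] at h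
    rcases ih _ _ h with hv | hm
    · cases b with
      | none =>
        simp [pvOmin] at hv; simp [hv]
      | some u =>
        simp only [pvOmin] at hv
        rcases min_choice u x with hc | hc <;> rw [hc] at hv
        · exact Or.inl hv
        · simp at hv; simp [hv]
    · simp [hm]

theorem pvMfold_of_le (l : List Int) (v : Int) (h : ∀ x ∈ l, v ≤ x) :
    pvMfold (some v) l = some v := by
  induction l with
  | nil => rfl
  | cons x l ih =>
    rw [pvMfold_cons]
    have hx : min v x = v := min_eq_left (h x (by simp))
    simp only [pvOmin, hx]
    exact ih (fun y hy => h y (by simp [hy]))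

theorem pvMfold_isMin : ∀ (l : List Int) (v w : Int), pvMfold (some v) l = some w →
    (w = v ∨ w ∈ l) ∧ w ≤ v ∧ ∀ x ∈ l, w ≤ x := by
  intro l
  induction l with
  | nil =>
    intro v w h
    simp only [pvMfold, List.foldl_nil, Option.some.injEq] at h
    subst h
    exact ⟨Or.inl rfl, le_refl _, by simp⟩
  | cons x l ih =>
    intro v w h
    rw [pvMfold_cons] at h
    have h' : pvMfold (some (min v x)) l = some w := h
    obtain ⟨hmem, hle, hall⟩ := ih _ _ h'
    have hwv : w ≤ v := le_trans hle (min_le_left _ _)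
    have hwx : w ≤ x := le_trans hle (min_le_right _ _)
    refine ⟨?_, hwv, ?_⟩
    · rcases hmem with h1 | h1
      · rcases min_choice v x with hc | hc <;> rw [hc] at h1
        · exact Or.inl h1
        · exact Or.inr (by simp [h1])
      · exact Or.inr (by simp [h1])
    · intro y hy
      rcases List.mem_cons.1 hy with rfl | hy
      · exact hwx
      · exact hall y hy

theorem pvMfold_isSome (l : List Int) : ∀ v, ∃ w, pvMfold (some v) l = some w := by
  induction l with
  | nil => intro v; exact ⟨v, rfl⟩
  | cons x l ih =>
    intro v
    rw [pvMfold_cons]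
    exact ih (min v x)

theorem pvMfold_none_min (l : List Int) (w : Int) (h : pvMfold none l = some w) :
    w ∈ l ∧ ∀ x ∈ l, w ≤ x := by
  cases l with
  | nil => cases h
  | cons x l =>
    rw [pvMfold_cons] at h
    obtain ⟨hmem, hle, hall⟩ := pvMfold_isMin l x w h
    refine ⟨?_, ?_⟩
    · rcases hmem with rfl | h1
      · simp
      · simp [h1]
    · intro y hy
      rcases List.mem_cons.1 hy with rfl | hy
      · exact hle
      · exact hall y hy

theorem pvMfold_eq_of_mem_iff (l1 l2 : List Int) (h : ∀ x, x ∈ l1 ↔ x ∈ l2) :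
    pvMfold none l1 = pvMfold none l2 := by
  cases hl1 : pvMfold none l1 with
  | none =>
    cases hl2 : pvMfold none l2 with
    | none => rfl
    | some w2 =>
      exfalso
      have hw2 := (pvMfold_none_min l2 w2 hl2).1
      have hw1 : w2 ∈ l1 := (h w2).2 hw2
      cases l1 with
      | nil => cases hw1
      | cons x l =>
        rw [pvMfold_cons] at hl1
        obtain ⟨w, hw⟩ := pvMfold_isSome l x
        rw [show pvOmin none (some x) = some x from rfl] at hl1
        rw [hw] at hl1
        cases hl1
  | some w1 =>
    obtain ⟨hm1, hb1⟩ := pvMfold_none_min l1 w1 hl1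
    cases hl2 : pvMfold none l2 with
    | none =>
      exfalso
      have hw1 : w1 ∈ l2 := (h w1).1 hm1
      cases l2 with
      | nil => cases hw1
      | cons x l =>
        rw [pvMfold_cons] at hl2
        obtain ⟨w, hw⟩ := pvMfold_isSome l x
        rw [show pvOmin none (some x) = some x from rfl] at hl2
        rw [hw] at hl2
        cases hl2
    | some w2 =>
      obtain ⟨hm2, hb2⟩ := pvMfold_none_min l2 w2 hl2
      have h12 : w1 ≤ w2 := hb1 w2 ((h w2).2 hm2)
      have h21 : w2 ≤ w1 := hb2 w1 ((h w1).1 hm1)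
      rw [le_antisymm h12 h21]

theorem pvFlatMap_mem_iff {β γ : Type} (l1 l2 : List β) (g : β → List γ)
    (h : ∀ t, t ∈ l1 ↔ t ∈ l2) (x : γ) :
    x ∈ l1.flatMap g ↔ x ∈ l2.flatMap g := by
  simp only [List.mem_flatMap]
  exact exists_congr fun t => and_congr_left' (h t)

-- ---------- the shared child-generation semantics ----------

-- raw child states (red, blue, rvisited, bvisited)
def pvStepBlue (maze : List (List Int)) (n m f4 red blue bx by_ nr : Int) (rv1 : List Int) :
    List Int → Int → List (Int × Int × List Int × List Int) × List Int := fun bv2 j =>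
  let push := fun (nbx nby : Int) =>
    let nb := nbx * m + nby
    let bv3 := PySem.Set.add bv2 nb
    ([(nr, nb, rv1, bv3)], (PySem.Set.remove? bv3 nb).getD bv3)
  if blue = f4 then
    (if nr = blue then ([], bv2) else push bx by_)
  else
    let nbx := bx + PySem.List.pyGetD [-1, 0, 1, 0] j 0
    let nby := by_ + PySem.List.pyGetD [0, 1, 0, -1] j 0
    if nr = blue ∧ nbx * m + nby = red then ([], bv2)
    else if nbx * m + nby = nr then ([], bv2)
    else if PySem.Set.contains bv2 (nbx * m + nby) then ([], bv2)
    else if nbx < 0 ∨ nbx ≥ n ∨ nby < 0 ∨ nby ≥ m then ([], bv2)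
    else if PySem.List.pyGetD (PySem.List.pyGetD maze nbx []) nby 0 = 5 then ([], bv2)
    else push nbx nby

def pvStepRed (maze : List (List Int)) (n m f3 f4 red blue : Int) :
    List Int × List Int → Int → List (Int × Int × List Int × List Int) × (List Int × List Int) :=
  fun s i =>
    let rv := s.1
    let bv := s.2
    let rx := PySem.Int.floordiv red m
    let ry := PySem.Int.mod red m
    let bx := PySem.Int.floordiv blue m
    let by_ := PySem.Int.mod blue m
    let inner := fun (nrx nry : Int) =>
      let nr := nrx * m + nry
      let rv1 := PySem.Set.add rv nr
      let em := pvEmit (pvStepBlue maze n m f4 red blue bx by_ nr rv1) bv (PySem.List.pyRange 0 4 1)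
      let bvf := pvFin (pvStepBlue maze n m f4 red blue bx by_ nr rv1) bv (PySem.List.pyRange 0 4 1)
      (em, ((PySem.Set.remove? rv1 nr).getD rv1, bvf))
    if red = f3 then inner rx ry
    else
      let nrx := rx + PySem.List.pyGetD [-1, 0, 1, 0] i 0
      let nry := ry + PySem.List.pyGetD [0, 1, 0, -1] i 0
      if PySem.Set.contains rv (nrx * m + nry) then ([], s)
      else if nrx < 0 ∨ nrx ≥ n ∨ nry < 0 ∨ nry ≥ m then ([], s)
      else if PySem.List.pyGetD (PySem.List.pyGetD maze nrx []) nry 0 = 5 then ([], s)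
      else inner nrx nry

def pvExpandA (maze : List (List Int)) (n m f3 f4 red blue : Int) (rv bv : List Int) :
    List (Int × Int × List Int × List Int) :=
  pvEmit (pvStepRed maze n m f3 f4 red blue) (rv, bv) (PySem.List.pyRange 0 4 1)

-- reference child generation (flatMap shaped; no threaded state)
def pvJListB (maze : List (List Int)) (n m f4 red blue bx by_ nr : Int) (rv bv : List Int) (j : Int) :
    List (Int × Int × List Int × List Int) :=
  let push := fun (nbx nby : Int) =>
    let nb := nbx * m + nby
    [(nr, nb, PySem.Set.union rv [nr], PySem.Set.union bv [nb])]
  if blue = f4 then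
    (if nr = blue then [] else push bx by_)
  else
    let nbx := bx + PySem.List.pyGetD [-1, 0, 1, 0] j 0
    let nby := by_ + PySem.List.pyGetD [0, 1, 0, -1] j 0
    if nr = blue ∧ nbx * m + nby = red then []
    else if nbx * m + nby = nr then []
    else if PySem.Set.contains bv (nbx * m + nby) then []
    else if nbx < 0 ∨ nbx ≥ n ∨ nby < 0 ∨ nby ≥ m then []
    else if PySem.List.pyGetD (PySem.List.pyGetD maze nbx []) nby 0 = 5 then []
    else push nbx nby

def pvIListB (maze : List (List Int)) (n m f3 f4 red blue : Int) (rv bv : List Int) (i : Int) :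
    List (Int × Int × List Int × List Int) :=
  let rx := PySem.Int.floordiv red m
  let ry := PySem.Int.mod red m
  let bx := PySem.Int.floordiv blue m
  let by_ := PySem.Int.mod blue m
  let go := fun (nrx nry : Int) =>
    (PySem.List.pyRange 0 4 1).flatMap (pvJListB maze n m f4 red blue bx by_ (nrx * m + nry) rv bv)
  if red = f3 then go rx ry
  else
    let nrx := rx + PySem.List.pyGetD [-1, 0, 1, 0] i 0
    let nry := ry + PySem.List.pyGetD [0, 1, 0, -1] i 0
    if PySem.Set.contains rv (nrx * m + nry) then []
    else if nrx < 0 ∨ nrx ≥ n ∨ nry < 0 ∨ nry ≥ m then []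
    else if PySem.List.pyGetD (PySem.List.pyGetD maze nrx []) nry 0 = 5 then []
    else go nrx nry

def pvExpandB (maze : List (List Int)) (n m f3 f4 red blue : Int) (rv bv : List Int) :
    List (Int × Int × List Int × List Int) :=
  (PySem.List.pyRange 0 4 1).flatMap (pvIListB maze n m f3 f4 red blue rv bv)

-- B-shaped child generation (targets ∘ pair filters), matching solutionAltGo
def pvBlockC (maze : List (List Int)) (n m f4 red blue nr : Int) (rv bv : List Int) :
    List (Int × Int × List Int × List Int) :=
  (solutionAltTargets maze n m blue f4 bv).flatMap (fun nb =>
    if nb = nr then []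
    else if nr = blue ∧ (blue = f4 ∨ nb = red) then []
    else [(nr, nb, PySem.Set.union rv [nr], PySem.Set.union bv [nb])])

def pvExpandC (maze : List (List Int)) (n m f3 f4 red blue : Int) (rv bv : List Int) :
    List (Int × Int × List Int × List Int) :=
  (solutionAltTargets maze n m red f3 rv).flatMap (fun nr =>
    pvBlockC maze n m f4 red blue nr rv bv)

-- ---------- one-step lemmas for the two ports ----------

theorem solutionGo_cons (maze : List (List Int)) (n m f3 f4 : Int) (fuel : Nat)
    (cnt red blue : Int) (rvis bvis : List Int)
    (rest : List (Int × Int × Int × List Int × List Int)) :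
    solutionGo maze n m f3 f4 (fuel + 1) ((cnt, red, blue, rvis, bvis) :: rest) =
      if red = f3 ∧ blue = f4 then cnt
      else solutionGo maze n m f3 f4 fuel
        (rest ++ (pvExpandA maze n m f3 f4 red blue rvis bvis).map
          (fun t => (cnt + 1, t.1, t.2.1, t.2.2.1, t.2.2.2))) := by
  rw [solutionGo]
  by_cases hg : red = f3 ∧ blue = f4
  · simp [hg]
  · simp only [if_neg hg]
    congr 1
    rw [pvFoldl_shape _ (pvStepRed maze n m f3 f4 red blue)
        (fun t => (cnt + 1, t.1, t.2.1, t.2.2.1, t.2.2.2))]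
    all_goals try rfl
    intro q s a
    obtain ⟨rv, bv⟩ := s
    simp only [pvStepRed]
    by_cases hred : red = f3
    · simp only [if_pos hred]
      rw [pvFoldl_shape _
          (pvStepBlue maze n m f4 red blue (PySem.Int.floordiv blue m) (PySem.Int.mod blue m)
            (PySem.Int.floordiv red m * m + PySem.Int.mod red m)
            (PySem.Set.add rv (PySem.Int.floordiv red m * m + PySem.Int.mod red m)))
          (fun t => (cnt + 1, t.1, t.2.1, t.2.2.1, t.2.2.2))]
      all_goals try (split_ifs <;> simp)
      all_goals intros
      all_goals simp only [pvStepBlue]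
      all_goals try (split_ifs <;> simp_all)
    · simp only [if_neg hred]
      rw [pvFoldl_shape _
          (pvStepBlue maze n m f4 red blue (PySem.Int.floordiv blue m) (PySem.Int.mod blue m)
            ((PySem.Int.floordiv red m + PySem.List.pyGetD [-1, 0, 1, 0] a 0) * m +
              (PySem.Int.mod red m + PySem.List.pyGetD [0, 1, 0, -1] a 0))
            (PySem.Set.add rv
              ((PySem.Int.floordiv red m + PySem.List.pyGetD [-1, 0, 1, 0] a 0) * m +
                (PySem.Int.mod red m + PySem.List.pyGetD [0, 1, 0, -1] a 0))))
          (fun t => (cnt + 1, t.1, t.2.1, t.2.2.1, t.2.2.2))]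
      all_goals try (split_ifs <;> simp)
      all_goals intros
      all_goals simp only [pvStepBlue]
      all_goals try (split_ifs <;> simp_all)

theorem solutionAltGo_cons (maze : List (List Int)) (n m f3 f4 : Int) (fuel : Nat)
    (red blue : Int) (rv bv : List Int) (cnt : Int) (best : Option Int) :
    solutionAltGo maze n m f3 f4 (fuel + 1) red blue rv bv cnt best =
      if (match best with | some v => decide (v ≤ cnt) | none => false) = true then best
      else if red = f3 ∧ blue = f4 then some cnt
      else (pvExpandC maze n m f3 f4 red blue rv bv).foldl
        (fun b t => solutionAltGo maze n m f3 f4 fuel t.1 t.2.1 t.2.2.1 t.2.2.2 (cnt + 1) b) best := by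
  rw [solutionAltGo.eq_def]
  by_cases hp : (match best with | some v => decide (v ≤ cnt) | none => false) = true
  · simp [hp]
  · simp only [if_neg hp]
    by_cases hg : red = f3 ∧ blue = f4
    · simp [hg]
    · simp only [if_neg hg]
      unfold pvExpandC
      rw [pvFoldl_flat _ (fun nr => pvBlockC maze n m f4 red blue nr rv bv)
          (fun b t => solutionAltGo maze n m f3 f4 fuel t.1 t.2.1 t.2.2.1 t.2.2.2 (cnt + 1) b)]
      intro b nr
      unfold pvBlockC
      rw [pvFoldl_flat _ (fun nb =>
            if nb = nr then []
            else if nr = blue ∧ (blue = f4 ∨ nb = red) then []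
            else [(nr, nb, PySem.Set.union rv [nr], PySem.Set.union bv [nb])])
          (fun b t => solutionAltGo maze n m f3 f4 fuel t.1 t.2.1 t.2.2.1 t.2.2.2 (cnt + 1) b)]
      intro b2 nb
      split_ifs <;> rfl

-- ---------- C-expansion has the same member set as the reference ----------

theorem pvRange4 : PySem.List.pyRange 0 4 1 = [0, 1, 2, 3] := by decide

theorem pvFilterMapFlat {α β γ : Type} (l : List α) (p : α → Bool) (f : α → β) (g : β → List γ) :
    ((l.filter p).map f).flatMap g = l.flatMap (fun a => if p a then g (f a) else []) := by
  induction l with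
  | nil => rfl
  | cons x l ih =>
    by_cases h : p x = true <;> simp [List.filter_cons, h, ih]

theorem pvChainEq (maze : List (List Int)) (n m f4 red blue nr nbx nby : Int)
    (rv bv : List Int) (hb4 : ¬ blue = f4) :
    (if (decide (0 ≤ nbx) && decide (nbx < n) && decide (0 ≤ nby) && decide (nby < m)
        && !decide (PySem.List.pyGetD (PySem.List.pyGetD maze nbx []) nby 0 = 5)
        && !PySem.Set.contains bv (nbx * m + nby))
      then (if nbx * m + nby = nr then ([] : List (Int × Int × List Int × List Int))
            else if nr = blue ∧ (blue = f4 ∨ nbx * m + nby = red) then []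
            else [(nr, nbx * m + nby, PySem.Set.union rv [nr], PySem.Set.union bv [nbx * m + nby])])
      else []) =
    (if nr = blue ∧ nbx * m + nby = red then ([] : List (Int × Int × List Int × List Int))
     else if nbx * m + nby = nr then []
     else if PySem.Set.contains bv (nbx * m + nby) then []
     else if nbx < 0 ∨ nbx ≥ n ∨ nby < 0 ∨ nby ≥ m then []
     else if PySem.List.pyGetD (PySem.List.pyGetD maze nbx []) nby 0 = 5 then []
     else [(nr, nbx * m + nby, PySem.Set.union rv [nr], PySem.Set.union bv [nbx * m + nby])]) := by
  simp only [or_iff_right hb4]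
  split_ifs <;> simp_all <;> omega

theorem pvBlockC_eq_move (maze : List (List Int)) (n m f4 red blue nr : Int)
    (rv bv : List Int) (hb4 : ¬ blue = f4) :
    pvBlockC maze n m f4 red blue nr rv bv =
      ([0, 1, 2, 3] : List Int).flatMap
        (pvJListB maze n m f4 red blue (PySem.Int.floordiv blue m) (PySem.Int.mod blue m) nr rv bv) := by
  simp only [pvBlockC, solutionAltTargets, if_neg hb4]
  rw [pvFilterMapFlat]
  simp only [List.flatMap_cons, List.flatMap_nil, List.append_nil, pvJListB, if_neg hb4]
  have e0 : PySem.List.pyGetD ([-1, 0, 1, 0] : List Int) 0 0 = -1 := by decide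
  have e1 : PySem.List.pyGetD ([-1, 0, 1, 0] : List Int) 1 0 = 0 := by decide
  have e2 : PySem.List.pyGetD ([-1, 0, 1, 0] : List Int) 2 0 = 1 := by decide
  have e3 : PySem.List.pyGetD ([-1, 0, 1, 0] : List Int) 3 0 = 0 := by decide
  have g0 : PySem.List.pyGetD ([0, 1, 0, -1] : List Int) 0 0 = 0 := by decide
  have g1 : PySem.List.pyGetD ([0, 1, 0, -1] : List Int) 1 0 = 1 := by decide
  have g2 : PySem.List.pyGetD ([0, 1, 0, -1] : List Int) 2 0 = 0 := by decide
  have g3 : PySem.List.pyGetD ([0, 1, 0, -1] : List Int) 3 0 = -1 := by decide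
  rw [e0, e1, e2, e3, g0, g1, g2, g3]
  have a1 : ∀ z : Int, z + (-1 : Int) = z - 1 := fun z => by ring
  have a2 : ∀ z : Int, z + (0 : Int) = z := fun z => by ring
  rw [a1, a1, a2, a2]
  rw [pvChainEq maze n m f4 red blue nr _ _ rv bv hb4,
      pvChainEq maze n m f4 red blue nr _ _ rv bv hb4,
      pvChainEq maze n m f4 red blue nr _ _ rv bv hb4,
      pvChainEq maze n m f4 red blue nr _ _ rv bv hb4]

theorem pvMemBlockC (maze : List (List Int)) (n m f4 red blue nr : Int)
    (rv bv : List Int) (t : Int × Int × List Int × List Int) :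
    t ∈ pvBlockC maze n m f4 red blue nr rv bv ↔
      t ∈ (PySem.List.pyRange 0 4 1).flatMap
        (pvJListB maze n m f4 red blue (PySem.Int.floordiv blue m) (PySem.Int.mod blue m) nr rv bv) := by
  by_cases hb4 : blue = f4
  · rw [pvRange4]
    simp only [pvBlockC, solutionAltTargets, if_pos hb4, pvJListB,
      List.flatMap_cons, List.flatMap_nil, List.append_nil]
    rw [PySem.Int.floordiv_mul_add_mod blue m]
    by_cases hnr : nr = blue
    · simp [hnr, hb4]
    · have hnr' : ¬ (blue = nr) := fun h => hnr h.symm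
      simp only [if_pos hb4, if_neg hnr]
      have hguard : ¬ (nr = blue ∧ (blue = f4 ∨ blue = red)) := fun h => hnr h.1
      simp [hnr', hguard]
  · rw [pvBlockC_eq_move maze n m f4 red blue nr rv bv hb4, pvRange4]

theorem pvMemRedBlock (maze : List (List Int)) (n m f3 f4 red blue nrx nry : Int)
    (rv bv : List Int) (t : Int × Int × List Int × List Int) :
    (t ∈ (if (decide (0 ≤ nrx) && decide (nrx < n) && decide (0 ≤ nry) && decide (nry < m)
          && !decide (PySem.List.pyGetD (PySem.List.pyGetD maze nrx []) nry 0 = 5)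
          && !PySem.Set.contains rv (nrx * m + nry))
        then pvBlockC maze n m f4 red blue (nrx * m + nry) rv bv
        else [])) ↔
    (t ∈ (if PySem.Set.contains rv (nrx * m + nry) then ([] : List (Int × Int × List Int × List Int))
          else if nrx < 0 ∨ nrx ≥ n ∨ nry < 0 ∨ nry ≥ m then []
          else if PySem.List.pyGetD (PySem.List.pyGetD maze nrx []) nry 0 = 5 then []
          else (PySem.List.pyRange 0 4 1).flatMap
            (pvJListB maze n m f4 red blue (PySem.Int.floordiv blue m) (PySem.Int.mod blue m)
              (nrx * m + nry) rv bv))) := by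
  by_cases hpass : (decide (0 ≤ nrx) && decide (nrx < n) && decide (0 ≤ nry) && decide (nry < m)
      && !decide (PySem.List.pyGetD (PySem.List.pyGetD maze nrx []) nry 0 = 5)
      && !PySem.Set.contains rv (nrx * m + nry)) = true
  · rw [if_pos hpass]
    simp only [Bool.and_eq_true, decide_eq_true_eq, Bool.not_eq_true',
      decide_eq_false_iff_not] at hpass
    obtain ⟨⟨⟨⟨⟨hx0, hxn⟩, hy0⟩, hym⟩, hwall⟩, hvis⟩ := hpass
    rw [if_neg (ne_true_of_eq_false hvis), if_neg (by omega), if_neg hwall]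
    exact pvMemBlockC maze n m f4 red blue (nrx * m + nry) rv bv t
  · rw [if_neg hpass]
    constructor
    · intro h; cases h
    · intro h
      exfalso
      by_cases hb : PySem.Set.contains rv (nrx * m + nry) = true
      · rw [if_pos hb] at h; cases h
      · rw [if_neg hb] at h
        by_cases ho : nrx < 0 ∨ nrx ≥ n ∨ nry < 0 ∨ nry ≥ m
        · rw [if_pos ho] at h; cases h
        · rw [if_neg ho] at h
          by_cases hw : PySem.List.pyGetD (PySem.List.pyGetD maze nrx []) nry 0 = 5
          · rw [if_pos hw] at h; cases h
          · push_neg at ho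
            refine hpass ?_
            simp only [Bool.and_eq_true, decide_eq_true_eq, Bool.not_eq_true',
              decide_eq_false_iff_not]
            refine ⟨⟨⟨⟨⟨by omega, by omega⟩, by omega⟩, by omega⟩, hw⟩, ?_⟩
            revert hb
            cases PySem.Set.contains rv (nrx * m + nry) <;> simp

theorem pvMemExpandC (maze : List (List Int)) (n m f3 f4 red blue : Int)
    (rv bv : List Int) (t : Int × Int × List Int × List Int) :
    t ∈ pvExpandC maze n m f3 f4 red blue rv bv ↔
      t ∈ pvExpandB maze n m f3 f4 red blue rv bv := by
  unfold pvExpandC pvExpandB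
  rw [pvRange4]
  by_cases hred : red = f3
  · simp only [solutionAltTargets, if_pos hred, List.flatMap_cons, List.flatMap_nil,
      List.append_nil, pvIListB, if_pos hred]
    rw [PySem.Int.floordiv_mul_add_mod red m]
    rw [pvMemBlockC]
    simp only [List.mem_append]
    tauto
  · simp only [solutionAltTargets, if_neg hred]
    rw [pvFilterMapFlat]
    simp only [List.flatMap_cons, List.flatMap_nil, List.append_nil, pvIListB, if_neg hred]
    have e0 : PySem.List.pyGetD ([-1, 0, 1, 0] : List Int) 0 0 = -1 := by decide
    have e1 : PySem.List.pyGetD ([-1, 0, 1, 0] : List Int) 1 0 = 0 := by decide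
    have e2 : PySem.List.pyGetD ([-1, 0, 1, 0] : List Int) 2 0 = 1 := by decide
    have e3 : PySem.List.pyGetD ([-1, 0, 1, 0] : List Int) 3 0 = 0 := by decide
    have g0 : PySem.List.pyGetD ([0, 1, 0, -1] : List Int) 0 0 = 0 := by decide
    have g1 : PySem.List.pyGetD ([0, 1, 0, -1] : List Int) 1 0 = 1 := by decide
    have g2 : PySem.List.pyGetD ([0, 1, 0, -1] : List Int) 2 0 = 0 := by decide
    have g3 : PySem.List.pyGetD ([0, 1, 0, -1] : List Int) 3 0 = -1 := by decide
    rw [e0, e1, e2, e3, g0, g1, g2, g3]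
    have a1 : ∀ z : Int, z + (-1 : Int) = z - 1 := fun z => by ring
    have a2 : ∀ z : Int, z + (0 : Int) = z := fun z => by ring
    rw [a1, a1, a2, a2]
    simp only [List.mem_append]
    exact or_congr (pvMemRedBlock maze n m f3 f4 red blue _ _ rv bv t)
      (or_congr (pvMemRedBlock maze n m f3 f4 red blue _ _ rv bv t)
        (or_congr (pvMemRedBlock maze n m f3 f4 red blue _ _ rv bv t)
          (pvMemRedBlock maze n m f3 f4 red blue _ _ rv bv t)))

-- ---------- state invariants ----------

def pvWf (n m : Int) (t : Int × Int × List Int × List Int) : Prop :=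
  t.2.2.1.Nodup ∧ t.2.2.2.Nodup ∧ t.1 ∈ t.2.2.1 ∧ t.2.1 ∈ t.2.2.2 ∧
  (∀ x ∈ t.2.2.1, 0 ≤ x ∧ x < n * m) ∧ (∀ x ∈ t.2.2.2, 0 ≤ x ∧ x < n * m)

def pvCard (t : Int × Int × List Int × List Int) : Nat :=
  t.2.2.1.toFinset.card + t.2.2.2.toFinset.card

def pvES (a b : Int × Int × List Int × List Int) : Prop :=
  a.1 = b.1 ∧ a.2.1 = b.2.1 ∧ (∀ x : Int, x ∈ a.2.2.1 ↔ x ∈ b.2.2.1) ∧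
  (∀ x : Int, x ∈ a.2.2.2 ↔ x ∈ b.2.2.2)

def pvR (n m : Int) (s a b : Int × Int × List Int × List Int) : Prop :=
  pvES a b ∧ pvWf n m a ∧ pvWf n m b ∧ pvCard s + 1 ≤ pvCard a

-- ---------- small set lemmas ----------

theorem pvContains_congr (s t : List Int) (h : ∀ x : Int, x ∈ s ↔ x ∈ t) (x : Int) :
    PySem.Set.contains s x = PySem.Set.contains t x := by
  by_cases hx : x ∈ s
  · rw [(PySem.Set.contains_iff s x).2 hx, (PySem.Set.contains_iff t x).2 ((h x).1 hx)]
  · have hx' : x ∉ t := fun hc => hx ((h x).2 hc)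
    rw [Bool.eq_false_iff.2 (fun hc => hx ((PySem.Set.contains_iff s x).1 hc)),
        Bool.eq_false_iff.2 (fun hc => hx' ((PySem.Set.contains_iff t x).1 hc))]

theorem pvRemoveGetD_of_mem (s : List Int) (x : Int) (h : x ∈ s) :
    (PySem.Set.remove? s x).getD s = PySem.Set.discard s x := by
  rw [PySem.Set.remove?_of_mem h]; rfl

theorem pvDiscard_of_not_mem (s : List Int) (x : Int) (h : x ∉ s) :
    PySem.Set.discard s x = s := by
  unfold PySem.Set.discard
  apply List.filter_eq_self.2
  intro y hy
  simp only [Bool.not_eq_eq_eq_not, Bool.not_true, beq_eq_false_iff_ne, ne_eq]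
  exact fun he => h (he ▸ hy)

theorem pvDiscard_append_self (s : List Int) (x : Int) (h : x ∉ s) :
    PySem.Set.discard (s ++ [x]) x = s := by
  unfold PySem.Set.discard
  rw [List.filter_append]
  have h2 : List.filter (fun y => !y == x) [x] = [] := by simp
  rw [h2, List.append_nil]
  have := pvDiscard_of_not_mem s x h
  unfold PySem.Set.discard at this
  exact this

theorem pvAddRemove_restore (s : List Int) (x : Int) (h : x ∉ s) :
    (PySem.Set.remove? (PySem.Set.add s x) x).getD (PySem.Set.add s x) = s := by
  rw [PySem.Set.add_of_not_mem h,
      pvRemoveGetD_of_mem _ _ (by simp), pvDiscard_append_self s x h]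

theorem pvMem_discard' (s : List Int) (x y : Int) :
    y ∈ PySem.Set.discard s x ↔ y ∈ s ∧ y ≠ x := PySem.Set.mem_discard s x y

theorem pvToFinset_eq_of_mem_iff (s t : List Int) (h : ∀ x : Int, x ∈ s ↔ x ∈ t) :
    s.toFinset = t.toFinset := by
  apply Finset.ext
  intro x
  simp only [List.mem_toFinset]
  exact h x

theorem pvCardTF_append (s : List Int) (x : Int) (h : x ∉ s) :
    (s ++ [x]).toFinset.card = s.toFinset.card + 1 := by
  rw [List.toFinset_append]
  simp only [List.toFinset_cons, List.toFinset_nil, insert_empty_eq]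
  rw [Finset.union_comm, ← Finset.insert_eq]
  exact Finset.card_insert_of_notMem (by simpa using h)

theorem pvCell_range (n m nrx nry : Int)
    (h : ¬(nrx < 0 ∨ nrx ≥ n ∨ nry < 0 ∨ nry ≥ m)) :
    0 ≤ nrx * m + nry ∧ nrx * m + nry < n * m := by
  push_neg at h
  obtain ⟨h1, h2, h3, h4⟩ := h
  constructor
  · have : 0 ≤ nrx * m := mul_nonneg h1 (by omega)
    omega
  · have hstep : (nrx + 1) * m ≤ n * m := by
      apply mul_le_mul_of_nonneg_right (by omega) (by omega)
    nlinarith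

theorem pvWf_card_le (n m : Int) (t : Int × Int × List Int × List Int) (h : pvWf n m t) :
    pvCard t ≤ 2 * (n * m).toNat := by
  obtain ⟨hn1, hn2, _, _, hr, hb⟩ := h
  have key : ∀ (s : List Int), s.Nodup → (∀ x ∈ s, 0 ≤ x ∧ x < n * m) →
      s.toFinset.card ≤ (n * m).toNat := by
    intro s hnd hrange
    have hsub : s.toFinset ⊆ Finset.Ico 0 (n * m) := by
      intro x hx
      rw [List.mem_toFinset] at hx
      simp only [Finset.mem_Ico]
      exact ⟨(hrange x hx).1, (hrange x hx).2⟩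
    calc s.toFinset.card ≤ (Finset.Ico (0 : Int) (n * m)).card := Finset.card_le_card hsub
      _ = (n * m).toNat := by rw [Int.card_Ico]; simp
  have := key _ hn1 hr
  have := key _ hn2 hb
  unfold pvCard
  omega

-- pvEmit relation lemma that also carries the threaded-state invariant to the end
theorem pvEmit_rel_inv {σ β β' : Type} (f : σ → Int → List β × σ) (h : Int → List β')
    (R : β → β' → Prop) (Inv : σ → Prop) :
    ∀ (l : List Int) (s0 : σ), Inv s0 →
      (∀ s a, Inv s → a ∈ l → List.Forall₂ R ((f s a).1) (h a) ∧ Inv ((f s a).2)) →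
      List.Forall₂ R (pvEmit f s0 l) (l.flatMap h) ∧ Inv (pvFin f s0 l) := by
  intro l
  induction l with
  | nil => intro s0 hs _; exact ⟨List.Forall₂.nil, hs⟩
  | cons a l ih =>
    intro s0 hs H
    have h1 := H s0 a hs (by simp)
    have h2 := ih _ h1.2 (fun s b hs hb => H s b hs (by simp [hb]))
    exact ⟨pvForall2_append h1.1 h2.1, h2.2⟩

theorem pvMemUnion1 (s : List Int) (y x : Int) :
    x ∈ PySem.Set.union s [y] ↔ x ∈ s ∨ x = y := by
  rw [PySem.Set.mem_union]; simp

theorem pvMkR (n m red0 blue0 : Int) (rv0 bv0 : List Int) (nr nb : Int)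
    (ra ba rb bb : List Int)
    (h1 : ∀ x : Int, x ∈ ra ↔ x ∈ rb) (h2 : ∀ x : Int, x ∈ ba ↔ x ∈ bb)
    (hnda : ra.Nodup) (hndb : ba.Nodup) (hnda' : rb.Nodup) (hndb' : bb.Nodup)
    (hmr : nr ∈ ra) (hmb : nb ∈ ba)
    (hrga : ∀ x ∈ ra, 0 ≤ x ∧ x < n * m) (hrgb2 : ∀ x ∈ ba, 0 ≤ x ∧ x < n * m)
    (hcard : rv0.toFinset.card + bv0.toFinset.card + 1 ≤ ra.toFinset.card + ba.toFinset.card) :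
    pvR n m (red0, blue0, rv0, bv0) (nr, nb, ra, ba) (nr, nb, rb, bb) := by
  refine ⟨⟨rfl, rfl, h1, h2⟩, ⟨hnda, hndb, hmr, hmb, hrga, hrgb2⟩,
    ⟨hnda', hndb', (h1 nr).1 hmr, (h2 nb).1 hmb, ?_, ?_⟩, ?_⟩
  · intro x hx; exact hrga x ((h1 x).2 hx)
  · intro x hx; exact hrgb2 x ((h2 x).2 hx)
  · show rv0.toFinset.card + bv0.toFinset.card + 1 ≤ ra.toFinset.card + ba.toFinset.card
    exact hcard

theorem pvExpand_rel (maze : List (List Int)) (n m f3 f4 red blue : Int) (rv bv rv' bv' : List Int)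
    (hwf : pvWf n m (red, blue, rv, bv)) (hwf2 : pvWf n m (red, blue, rv', bv'))
    (hrv : ∀ x : Int, x ∈ rv ↔ x ∈ rv') (hbv : ∀ x : Int, x ∈ bv ↔ x ∈ bv')
    (hng : ¬(red = f3 ∧ blue = f4)) :
    List.Forall₂ (pvR n m (red, blue, rv, bv))
      (pvExpandA maze n m f3 f4 red blue rv bv)
      (pvExpandB maze n m f3 f4 red blue rv' bv') := by
  obtain ⟨hndr, hndb, hredm, hbluem, hrgr, hrgb⟩ := hwf
  obtain ⟨hndr', hndb', hredm', hbluem', hrgr', hrgb'⟩ := hwf2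
  simp only at hndr hndb hredm hbluem hrgr hrgb hndr' hndb' hredm' hbluem' hrgr' hrgb'
  unfold pvExpandA pvExpandB
  by_cases hred : red = f3
  · -- red frozen on its destination; blue still moves (non-goal state)
    have hb4 : ¬ blue = f4 := fun h => hng ⟨hred, h⟩
    refine (pvEmit_rel_inv _ _ _
      (fun s : List Int × List Int => s.1.Nodup ∧ s.2.Nodup ∧
        (∀ x : Int, x ∈ s.1 ∨ x = red ↔ x ∈ rv) ∧ (∀ x : Int, x ∈ s.2 ↔ x ∈ bv))
      _ _ ⟨hndr, hndb, ?_, fun _ => Iff.rfl⟩ ?_).1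
    · intro x
      exact ⟨fun hx => hx.elim id (fun h => h ▸ hredm), Or.inl⟩
    · intro s a hs _
      obtain ⟨hs1, hs2, hs3, hs4⟩ := hs
      simp only [pvStepRed, pvIListB, if_pos hred]
      rw [show PySem.Int.floordiv red m * m + PySem.Int.mod red m = red from
        PySem.Int.floordiv_mul_add_mod red m]
      have hrv1 : ∀ x : Int, x ∈ PySem.Set.add s.1 red ↔ x ∈ rv := by
        intro x; rw [PySem.Set.mem_add]; exact hs3 x
      have hmain := pvEmit_rel_inv
        (pvStepBlue maze n m f4 red blue (PySem.Int.floordiv blue m) (PySem.Int.mod blue m)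
          red (PySem.Set.add s.1 red))
        (pvJListB maze n m f4 red blue (PySem.Int.floordiv blue m) (PySem.Int.mod blue m)
          red rv' bv')
        (pvR n m (red, blue, rv, bv))
        (fun bv2 => bv2.Nodup ∧ (∀ x : Int, x ∈ bv2 ↔ x ∈ bv))
        (PySem.List.pyRange 0 4 1) s.2 ⟨hs2, hs4⟩ ?_
      · refine ⟨hmain.1, ?_, hmain.2.1, ?_, hmain.2.2⟩
        · rw [pvRemoveGetD_of_mem _ _ ((PySem.Set.mem_add _ _ _).2 (Or.inr rfl))]
          exact PySem.Set.nodup_discard _ _ (PySem.Set.nodup_add _ _ hs1)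
        · intro x
          rw [pvRemoveGetD_of_mem _ _ ((PySem.Set.mem_add _ _ _).2 (Or.inr rfl)),
            pvMem_discard']
          constructor
          · rintro (⟨hx, _⟩ | rfl)
            · exact (hrv1 x).1 hx
            · exact hredm
          · intro hx
            by_cases hxr : x = red
            · exact Or.inr hxr
            · exact Or.inl ⟨(hrv1 x).2 hx, hxr⟩
      · intro bv2 j hb2 _
        obtain ⟨hb21, hb22⟩ := hb2
        simp only [pvStepBlue, pvJListB, if_neg hb4]
        rw [pvContains_congr bv2 bv' (fun x => (hb22 x).trans (hbv x))]
        split_ifs with hc1 hc2 hc3 hc4 hc5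
        · exact ⟨List.Forall₂.nil, hb21, hb22⟩
        · exact ⟨List.Forall₂.nil, hb21, hb22⟩
        · exact ⟨List.Forall₂.nil, hb21, hb22⟩
        · exact ⟨List.Forall₂.nil, hb21, hb22⟩
        · exact ⟨List.Forall₂.nil, hb21, hb22⟩
        · -- push: one child emitted on each side
          have hnb_notmem : ((PySem.Int.floordiv blue m + PySem.List.pyGetD [-1, 0, 1, 0] j 0) * m +
              (PySem.Int.mod blue m + PySem.List.pyGetD [0, 1, 0, -1] j 0)) ∉ bv2 := by
            intro hmem
            exact hc3 ((PySem.Set.contains_iff _ _).2 ((hbv _).1 ((hb22 _).1 hmem)))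
          have hnbrange := pvCell_range n m _ _ hc4
          constructor
          · refine List.Forall₂.cons (pvMkR n m red blue rv bv _ _ _ _ _ _ ?_ ?_ ?_ ?_ ?_ ?_ ?_ ?_ ?_ ?_ ?_) List.Forall₂.nil
            · intro x
              rw [hrv1 x, pvMemUnion1]
              exact ⟨fun h => Or.inl ((hrv x).1 h),
                fun h => h.elim (fun h => (hrv x).2 h) (fun h => h ▸ hredm)⟩
            · intro x
              rw [PySem.Set.mem_add, pvMemUnion1]
              exact ⟨fun h => h.elim (fun h => Or.inl ((hbv x).1 ((hb22 x).1 h))) Or.inr,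
                fun h => h.elim (fun h => Or.inl ((hb22 x).2 ((hbv x).2 h))) Or.inr⟩
            · exact PySem.Set.nodup_add _ _ hs1
            · exact PySem.Set.nodup_add _ _ hb21
            · exact PySem.Set.nodup_union _ _ hndr'
            · exact PySem.Set.nodup_union _ _ hndb'
            · exact (hrv1 _).2 hredm
            · exact (PySem.Set.mem_add _ _ _).2 (Or.inr rfl)
            · intro x hx; exact hrgr x ((hrv1 x).1 hx)
            · intro x hx
              rcases (PySem.Set.mem_add _ _ _).1 hx with h | rfl
              · exact hrgb x ((hb22 x).1 h)
              · exact hnbrange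
            · rw [pvToFinset_eq_of_mem_iff _ _ hrv1,
                PySem.Set.add_of_not_mem hnb_notmem, pvCardTF_append _ _ hnb_notmem,
                pvToFinset_eq_of_mem_iff _ _ hb22]
              omega
          · rw [pvAddRemove_restore _ _ hnb_notmem]
            exact ⟨hb21, hb22⟩
  · -- red actually moves
    by_cases hb4 : blue = f4
    · -- blue frozen on its destination
      refine (pvEmit_rel_inv _ _ _
        (fun s : List Int × List Int => s.1 = rv ∧ s.2.Nodup ∧
          (∀ x : Int, x ∈ s.2 ∨ x = blue ↔ x ∈ bv))
        _ _ ⟨rfl, hndb, ?_⟩ ?_).1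
      · intro x
        exact ⟨fun hx => hx.elim id (fun h => h ▸ hbluem), Or.inl⟩
      · intro s a hs _
        obtain ⟨hs1, hs2, hs3⟩ := hs
        simp only [pvStepRed, pvIListB, if_neg hred]
        rw [hs1, pvContains_congr rv rv' hrv]
        split_ifs with hc1 hc2 hc3
        · exact ⟨List.Forall₂.nil, hs1, hs2, hs3⟩
        · exact ⟨List.Forall₂.nil, hs1, hs2, hs3⟩
        · exact ⟨List.Forall₂.nil, hs1, hs2, hs3⟩
        · -- red moves to a fresh legal cell; inner loop over blue (frozen)
          have hnr_notmem : ((PySem.Int.floordiv red m + PySem.List.pyGetD [-1, 0, 1, 0] a 0) * m +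
              (PySem.Int.mod red m + PySem.List.pyGetD [0, 1, 0, -1] a 0)) ∉ rv := by
            intro hmem
            exact hc1 ((PySem.Set.contains_iff _ _).2 ((hrv _).1 hmem))
          have hnrrange := pvCell_range n m _ _ hc2
          have hmain := pvEmit_rel_inv
            (pvStepBlue maze n m f4 red blue (PySem.Int.floordiv blue m) (PySem.Int.mod blue m)
              ((PySem.Int.floordiv red m + PySem.List.pyGetD [-1, 0, 1, 0] a 0) * m +
                (PySem.Int.mod red m + PySem.List.pyGetD [0, 1, 0, -1] a 0))
              (PySem.Set.add rv
                ((PySem.Int.floordiv red m + PySem.List.pyGetD [-1, 0, 1, 0] a 0) * m +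
                  (PySem.Int.mod red m + PySem.List.pyGetD [0, 1, 0, -1] a 0))))
            (pvJListB maze n m f4 red blue (PySem.Int.floordiv blue m) (PySem.Int.mod blue m)
              ((PySem.Int.floordiv red m + PySem.List.pyGetD [-1, 0, 1, 0] a 0) * m +
                (PySem.Int.mod red m + PySem.List.pyGetD [0, 1, 0, -1] a 0)) rv' bv')
            (pvR n m (red, blue, rv, bv))
            (fun bv2 => bv2.Nodup ∧ (∀ x : Int, x ∈ bv2 ∨ x = blue ↔ x ∈ bv))
            (PySem.List.pyRange 0 4 1) s.2 ⟨hs2, hs3⟩ ?_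
          · refine ⟨hmain.1, ?_, hmain.2⟩
            rw [pvAddRemove_restore _ _ hnr_notmem]
          · intro bv2 j hb2 _
            obtain ⟨hb21, hb22⟩ := hb2
            simp only [pvStepBlue, pvJListB, if_pos hb4]
            rw [show PySem.Int.floordiv blue m * m + PySem.Int.mod blue m = blue from
              PySem.Int.floordiv_mul_add_mod blue m]
            split_ifs with hc0
            · exact ⟨List.Forall₂.nil, hb21, hb22⟩
            · constructor
              · refine List.Forall₂.cons (pvMkR n m red blue rv bv _ _ _ _ _ _ ?_ ?_ ?_ ?_ ?_ ?_ ?_ ?_ ?_ ?_ ?_) List.Forall₂.nil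
                · intro x
                  rw [PySem.Set.mem_add, pvMemUnion1]
                  exact ⟨fun h => h.elim (fun h => Or.inl ((hrv x).1 h)) Or.inr,
                    fun h => h.elim (fun h => Or.inl ((hrv x).2 h)) Or.inr⟩
                · intro x
                  rw [PySem.Set.mem_add, pvMemUnion1]
                  constructor
                  · rintro (h | rfl)
                    · rcases (hbv x).1 ((hb22 x).1 (Or.inl h)) with h'
                      exact Or.inl h'
                    · exact Or.inr rfl
                  · rintro (h | rfl)
                    · have hx : x ∈ bv := (hbv x).2 h
                      rcases (hb22 x).2 hx with h' | rfl
                      · exact Or.inl h'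
                      · exact Or.inr rfl
                    · exact Or.inr rfl
                · exact PySem.Set.nodup_add _ _ hndr
                · exact PySem.Set.nodup_add _ _ hb21
                · exact PySem.Set.nodup_union _ _ hndr'
                · exact PySem.Set.nodup_union _ _ hndb'
                · exact (PySem.Set.mem_add _ _ _).2 (Or.inr rfl)
                · exact (PySem.Set.mem_add _ _ _).2 (Or.inr rfl)
                · intro x hx
                  rcases (PySem.Set.mem_add _ _ _).1 hx with h | rfl
                  · exact hrgr x h
                  · exact hnrrange
                · intro x hx
                  rcases (PySem.Set.mem_add _ _ _).1 hx with h | rfl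
                  · exact hrgb x ((hb22 x).1 (Or.inl h))
                  · exact hrgb _ hbluem
                · rw [PySem.Set.add_of_not_mem hnr_notmem, pvCardTF_append _ _ hnr_notmem]
                  have : (PySem.Set.add bv2 blue).toFinset.card = bv.toFinset.card := by
                    apply congrArg Finset.card
                    apply pvToFinset_eq_of_mem_iff
                    intro x
                    rw [PySem.Set.mem_add]
                    exact hb22 x
                  omega
              · rw [pvRemoveGetD_of_mem _ _ ((PySem.Set.mem_add _ _ _).2 (Or.inr rfl))]
                constructor
                · exact PySem.Set.nodup_discard _ _ (PySem.Set.nodup_add _ _ hb21)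
                · intro x
                  rw [pvMem_discard']
                  constructor
                  · rintro (⟨hx, _⟩ | rfl)
                    · exact (hb22 x).1 ((PySem.Set.mem_add _ _ _).1 hx |>.elim Or.inl Or.inr)
                    · exact hbluem
                  · intro hx
                    by_cases hxb : x = blue
                    · exact Or.inr hxb
                    · rcases (hb22 x).2 hx with h | h
                      · exact Or.inl ⟨(PySem.Set.mem_add _ _ _).2 (Or.inl h), hxb⟩
                      · exact absurd h hxb
    · -- both carts move
      refine (pvEmit_rel_inv _ _ _
        (fun s : List Int × List Int => s.1 = rv ∧ s.2 = bv) _ _ ⟨rfl, rfl⟩ ?_).1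
      intro s a hs _
      obtain ⟨hs1, hs2⟩ := hs
      simp only [pvStepRed, pvIListB, if_neg hred]
      rw [hs1, hs2, pvContains_congr rv rv' hrv]
      split_ifs with hc1 hc2 hc3
      · exact ⟨List.Forall₂.nil, hs1, hs2⟩
      · exact ⟨List.Forall₂.nil, hs1, hs2⟩
      · exact ⟨List.Forall₂.nil, hs1, hs2⟩
      · have hnr_notmem : ((PySem.Int.floordiv red m + PySem.List.pyGetD [-1, 0, 1, 0] a 0) * m +
            (PySem.Int.mod red m + PySem.List.pyGetD [0, 1, 0, -1] a 0)) ∉ rv := by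
          intro hmem
          exact hc1 ((PySem.Set.contains_iff _ _).2 ((hrv _).1 hmem))
        have hnrrange := pvCell_range n m _ _ hc2
        have hmain := pvEmit_rel_inv
          (pvStepBlue maze n m f4 red blue (PySem.Int.floordiv blue m) (PySem.Int.mod blue m)
            ((PySem.Int.floordiv red m + PySem.List.pyGetD [-1, 0, 1, 0] a 0) * m +
              (PySem.Int.mod red m + PySem.List.pyGetD [0, 1, 0, -1] a 0))
            (PySem.Set.add rv
              ((PySem.Int.floordiv red m + PySem.List.pyGetD [-1, 0, 1, 0] a 0) * m +
                (PySem.Int.mod red m + PySem.List.pyGetD [0, 1, 0, -1] a 0))))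
          (pvJListB maze n m f4 red blue (PySem.Int.floordiv blue m) (PySem.Int.mod blue m)
            ((PySem.Int.floordiv red m + PySem.List.pyGetD [-1, 0, 1, 0] a 0) * m +
              (PySem.Int.mod red m + PySem.List.pyGetD [0, 1, 0, -1] a 0)) rv' bv')
          (pvR n m (red, blue, rv, bv))
          (fun bv2 => bv2 = bv)
          (PySem.List.pyRange 0 4 1) bv rfl ?_
        · refine ⟨hmain.1, ?_, hmain.2⟩
          rw [pvAddRemove_restore _ _ hnr_notmem]
        · intro bv2 j hb2 _
          subst hb2
          simp only [pvStepBlue, pvJListB, if_neg hb4]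
          rw [pvContains_congr bv2 bv' hbv]
          split_ifs with hd1 hd2 hd3 hd4 hd5
          · exact ⟨List.Forall₂.nil, rfl⟩
          · exact ⟨List.Forall₂.nil, rfl⟩
          · exact ⟨List.Forall₂.nil, rfl⟩
          · exact ⟨List.Forall₂.nil, rfl⟩
          · exact ⟨List.Forall₂.nil, rfl⟩
          · have hnb_notmem : ((PySem.Int.floordiv blue m + PySem.List.pyGetD [-1, 0, 1, 0] j 0) * m +
                (PySem.Int.mod blue m + PySem.List.pyGetD [0, 1, 0, -1] j 0)) ∉ bv2 := by
              intro hmem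
              exact hd3 ((PySem.Set.contains_iff _ _).2 ((hbv _).1 hmem))
            have hnbrange := pvCell_range n m _ _ hd4
            constructor
            · refine List.Forall₂.cons (pvMkR n m red blue rv bv2 _ _ _ _ _ _ ?_ ?_ ?_ ?_ ?_ ?_ ?_ ?_ ?_ ?_ ?_) List.Forall₂.nil
              · intro x
                rw [PySem.Set.mem_add, pvMemUnion1]
                exact ⟨fun h => h.elim (fun h => Or.inl ((hrv x).1 h)) Or.inr,
                  fun h => h.elim (fun h => Or.inl ((hrv x).2 h)) Or.inr⟩
              · intro x
                rw [PySem.Set.mem_add, pvMemUnion1]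
                exact ⟨fun h => h.elim (fun h => Or.inl ((hbv x).1 h)) Or.inr,
                  fun h => h.elim (fun h => Or.inl ((hbv x).2 h)) Or.inr⟩
              · exact PySem.Set.nodup_add _ _ hndr
              · exact PySem.Set.nodup_add _ _ hndb
              · exact PySem.Set.nodup_union _ _ hndr'
              · exact PySem.Set.nodup_union _ _ hndb'
              · exact (PySem.Set.mem_add _ _ _).2 (Or.inr rfl)
              · exact (PySem.Set.mem_add _ _ _).2 (Or.inr rfl)
              · intro x hx
                rcases (PySem.Set.mem_add _ _ _).1 hx with h | rfl
                · exact hrgr x h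
                · exact hnrrange
              · intro x hx
                rcases (PySem.Set.mem_add _ _ _).1 hx with h | rfl
                · exact hrgb x h
                · exact hnbrange
              · rw [PySem.Set.add_of_not_mem hnr_notmem, pvCardTF_append _ _ hnr_notmem,
                  PySem.Set.add_of_not_mem hnb_notmem, pvCardTF_append _ _ hnb_notmem]
                omega
            · exact pvAddRemove_restore _ _ hnb_notmem

-- ---------- more Forall₂ / list utilities ----------

theorem pvForall2_mem_left {β β' : Type} {R : β → β' → Prop} {l1 : List β} {l2 : List β'}
    (h : List.Forall₂ R l1 l2) : ∀ a ∈ l1, ∃ b ∈ l2, R a b := by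
  induction h with
  | nil => intro a ha; cases ha
  | cons hx _ ih =>
    intro a ha
    rcases ha with _ | ha
    · exact ⟨_, by simp, hx⟩
    · obtain ⟨b, hb, hr⟩ := ih a (by assumption)
      exact ⟨b, by simp [hb], hr⟩

theorem pvForall2_mem_right {β β' : Type} {R : β → β' → Prop} {l1 : List β} {l2 : List β'}
    (h : List.Forall₂ R l1 l2) : ∀ b ∈ l2, ∃ a ∈ l1, R a b := by
  induction h with
  | nil => intro b hb; cases hb
  | cons hx _ ih =>
    intro b hb
    rcases hb with _ | hb
    · exact ⟨_, by simp, hx⟩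
    · obtain ⟨a, ha, hr⟩ := ih b (by assumption)
      exact ⟨a, by simp [ha], hr⟩

theorem pvForall2_flatMap_eq {β β' γ : Type} {P : β → β' → Prop} {l1 : List β} {l2 : List β'}
    (h : List.Forall₂ P l1 l2) (g : β → List γ) (g' : β' → List γ)
    (hg : ∀ a b, P a b → g a = g' b) : l1.flatMap g = l2.flatMap g' := by
  induction h with
  | nil => rfl
  | cons hx _ ih => simp only [List.flatMap_cons, hg _ _ hx, ih]

theorem pvFlatMap_congr {β γ : Type} {l : List β} (g g' : β → List γ)
    (h : ∀ a ∈ l, g a = g' a) : l.flatMap g = l.flatMap g' := by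
  induction l with
  | nil => rfl
  | cons x l ih =>
    simp only [List.flatMap_cons, h x (by simp)]
    rw [ih (fun a ha => h a (by simp [ha]))]

theorem pvOmin_comm (a b : Option Int) : pvOmin a b = pvOmin b a := by
  cases a <;> cases b <;> simp [pvOmin, min_comm]

-- ---------- cardinal transfer along pvES ----------

theorem pvCard_eq_of_ES (a b : Int × Int × List Int × List Int) (h : pvES a b) :
    pvCard a = pvCard b := by
  obtain ⟨_, _, h3, h4⟩ := h
  unfold pvCard
  rw [pvToFinset_eq_of_mem_iff _ _ h3, pvToFinset_eq_of_mem_iff _ _ h4]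

theorem pvES_symm {a b : Int × Int × List Int × List Int} (h : pvES a b) : pvES b a :=
  ⟨h.1.symm, h.2.1.symm, fun x => (h.2.2.1 x).symm, fun x => (h.2.2.2 x).symm⟩

theorem pvES_trans {a b c : Int × Int × List Int × List Int} (h1 : pvES a b) (h2 : pvES b c) :
    pvES a c :=
  ⟨h1.1.trans h2.1, h1.2.1.trans h2.2.1, fun x => (h1.2.2.1 x).trans (h2.2.2.1 x),
    fun x => (h1.2.2.2 x).trans (h2.2.2.2 x)⟩

-- B-children of a well-formed non-goal state: well-formed, strictly larger visited sets
theorem pvExpandB_facts (maze : List (List Int)) (n m f3 f4 : Int)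
    (s : Int × Int × List Int × List Int) (hwf : pvWf n m s) (hng : ¬(s.1 = f3 ∧ s.2.1 = f4)) :
    ∀ t ∈ pvExpandB maze n m f3 f4 s.1 s.2.1 s.2.2.1 s.2.2.2,
      pvWf n m t ∧ pvCard s + 1 ≤ pvCard t := by
  intro t ht
  obtain ⟨red0, blue0, rv0, bv0⟩ := s
  obtain ⟨a, _, hr⟩ := pvForall2_mem_right
    (pvExpand_rel maze n m f3 f4 red0 blue0 rv0 bv0 rv0 bv0 hwf hwf
      (fun _ => Iff.rfl) (fun _ => Iff.rfl) hng) t ht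
  exact ⟨hr.2.2.1, by rw [← pvCard_eq_of_ES a t hr.1]; exact hr.2.2.2⟩

theorem pvExpandC_facts (maze : List (List Int)) (n m f3 f4 : Int)
    (s : Int × Int × List Int × List Int) (hwf : pvWf n m s) (hng : ¬(s.1 = f3 ∧ s.2.1 = f4)) :
    ∀ t ∈ pvExpandC maze n m f3 f4 s.1 s.2.1 s.2.2.1 s.2.2.2,
      pvWf n m t ∧ pvCard s + 1 ≤ pvCard t := by
  intro t ht
  exact pvExpandB_facts maze n m f3 f4 s hwf hng t
    ((pvMemExpandC maze n m f3 f4 s.1 s.2.1 s.2.2.1 s.2.2.2 t).1 ht)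

theorem pvExpandA_rel_self (maze : List (List Int)) (n m f3 f4 : Int)
    (s : Int × Int × List Int × List Int) (hwf : pvWf n m s) (hng : ¬(s.1 = f3 ∧ s.2.1 = f4)) :
    List.Forall₂ (pvR n m s)
      (pvExpandA maze n m f3 f4 s.1 s.2.1 s.2.2.1 s.2.2.2)
      (pvExpandB maze n m f3 f4 s.1 s.2.1 s.2.2.1 s.2.2.2) := by
  obtain ⟨red0, blue0, rv0, bv0⟩ := s
  exact pvExpand_rel maze n m f3 f4 red0 blue0 rv0 bv0 rv0 bv0 hwf hwf
    (fun _ => Iff.rfl) (fun _ => Iff.rfl) hng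

-- length of the generated child list is at most 16
theorem pvJListB_len (maze : List (List Int)) (n m f4 red blue bx by_ nr : Int)
    (rv bv : List Int) (j : Int) :
    (pvJListB maze n m f4 red blue bx by_ nr rv bv j).length ≤ 1 := by
  simp only [pvJListB]
  split_ifs <;> simp

theorem pvIListB_len (maze : List (List Int)) (n m f3 f4 red blue : Int)
    (rv bv : List Int) (i : Int) :
    (pvIListB maze n m f3 f4 red blue rv bv i).length ≤ 4 := by
  simp only [pvIListB]
  have h4 : ∀ (nrx nry : Int),
      ((PySem.List.pyRange 0 4 1).flatMap
        (pvJListB maze n m f4 red blue (PySem.Int.floordiv blue m) (PySem.Int.mod blue m)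
          (nrx * m + nry) rv bv)).length ≤ 4 := by
    intro nrx nry
    have := pvFlatMap_length_le
      (pvJListB maze n m f4 red blue (PySem.Int.floordiv blue m) (PySem.Int.mod blue m)
        (nrx * m + nry) rv bv) 1 (PySem.List.pyRange 0 4 1)
      (fun a _ => pvJListB_len maze n m f4 red blue _ _ _ rv bv a)
    simpa using this
  split_ifs <;> simpa using h4 _ _

theorem pvExpandB_len (maze : List (List Int)) (n m f3 f4 red blue : Int) (rv bv : List Int) :
    (pvExpandB maze n m f3 f4 red blue rv bv).length ≤ 16 := by
  unfold pvExpandB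
  have := pvFlatMap_length_le (pvIListB maze n m f3 f4 red blue rv bv) 4
    (PySem.List.pyRange 0 4 1) (fun a _ => pvIListB_len maze n m f3 f4 red blue rv bv a)
  simpa using this

-- ---------- the goal-depth list ----------

def pvG (maze : List (List Int)) (n m f3 f4 : Int) : Nat → Int → (Int × Int × List Int × List Int) → List Int
  | 0, _, _ => []
  | fuel + 1, c, s =>
    if s.1 = f3 ∧ s.2.1 = f4 then [c]
    else (pvExpandB maze n m f3 f4 s.1 s.2.1 s.2.2.1 s.2.2.2).flatMap (pvG maze n m f3 f4 fuel (c + 1))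

theorem pvG_lb (maze : List (List Int)) (n m f3 f4 : Int) :
    ∀ (fuel : Nat) (c : Int) (s : Int × Int × List Int × List Int),
      ∀ x ∈ pvG maze n m f3 f4 fuel c s, c ≤ x := by
  intro fuel
  induction fuel with
  | zero => intro c s x hx; cases hx
  | succ fuel ih =>
    intro c s x hx
    rw [pvG] at hx
    split_ifs at hx with hgl
    · simp at hx; omega
    · rw [List.mem_flatMap] at hx
      obtain ⟨t, _, hx⟩ := hx
      have := ih (c + 1) t x hx
      omega

theorem pvG_fuel (maze : List (List Int)) (n m f3 f4 : Int) :
    ∀ (f1 f2 : Nat) (c : Int) (s : Int × Int × List Int × List Int), pvWf n m s →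
      2 * (n * m).toNat + 2 - pvCard s ≤ f1 → 2 * (n * m).toNat + 2 - pvCard s ≤ f2 →
      pvG maze n m f3 f4 f1 c s = pvG maze n m f3 f4 f2 c s := by
  intro f1
  induction f1 with
  | zero =>
    intro f2 c s hwf h1 _
    have := pvWf_card_le n m s hwf
    omega
  | succ f1 ih =>
    intro f2 c s hwf h1 h2
    have hcle := pvWf_card_le n m s hwf
    obtain ⟨f2', rfl⟩ : ∃ f2', f2 = f2' + 1 := ⟨f2 - 1, by omega⟩
    rw [pvG, pvG]
    split_ifs with hgl
    · rfl
    · apply pvFlatMap_congr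
      intro t ht
      obtain ⟨hwt, hct⟩ := pvExpandB_facts maze n m f3 f4 s hwf hgl t ht
      exact ih f2' (c + 1) t hwt (by omega) (by omega)

theorem pvForall2_comb {β γ γ' : Type} {R : β → γ → Prop} {R' : β → γ' → Prop} :
    ∀ {lA : List β} {lB : List γ} {lC : List γ'}, List.Forall₂ R lA lB → List.Forall₂ R' lA lC →
      List.Forall₂ (fun b c => ∃ a, R a b ∧ R' a c) lB lC := by
  intro lA
  induction lA with
  | nil =>
    intro lB lC h1 h2; cases h1; cases h2; exact List.Forall₂.nil
  | cons x l ih =>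
    intro lB lC h1 h2
    cases h1 with
    | cons hx h1 =>
      cases h2 with
      | cons hy h2 => exact List.Forall₂.cons ⟨x, hx, hy⟩ (ih h1 h2)

theorem pvG_congr (maze : List (List Int)) (n m f3 f4 : Int) :
    ∀ (fuel : Nat) (c : Int) (s s' : Int × Int × List Int × List Int),
      pvWf n m s → pvWf n m s' → pvES s s' →
      pvG maze n m f3 f4 fuel c s = pvG maze n m f3 f4 fuel c s' := by
  intro fuel
  induction fuel with
  | zero => intro _ _ _ _ _ _; rfl
  | succ fuel ih =>
    intro c s s' hwf hwf' hes
    obtain ⟨red1, blue1, rva, bva⟩ := s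
    obtain ⟨red2, blue2, rvb, bvb⟩ := s'
    obtain ⟨he1, he2, he3, he4⟩ := hes
    simp only at he1 he2 he3 he4
    subst he1; subst he2
    rw [pvG, pvG]
    simp only
    split_ifs with hgl
    · rfl
    · have hF1 := pvExpand_rel maze n m f3 f4 red1 blue1 rva bva rva bva hwf hwf
        (fun _ => Iff.rfl) (fun _ => Iff.rfl) hgl
      have hF2 := pvExpand_rel maze n m f3 f4 red1 blue1 rva bva rvb bvb hwf hwf' he3 he4 hgl
      have hcomb : List.Forall₂ (fun t t' => pvES t t' ∧ pvWf n m t ∧ pvWf n m t')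
          (pvExpandB maze n m f3 f4 red1 blue1 rva bva)
          (pvExpandB maze n m f3 f4 red1 blue1 rvb bvb) := by
        refine (pvForall2_comb hF1 hF2).imp ?_
        rintro t t' ⟨a, h1, h2⟩
        exact ⟨pvES_trans (pvES_symm h1.1) h2.1, h1.2.2.1, h2.2.2.1⟩
      exact pvForall2_flatMap_eq hcomb _ _
        (fun a b hab => ih (c + 1) a b hab.2.1 hab.2.2 hab.1)

theorem pvG_succ (maze : List (List Int)) (n m f3 f4 : Int) (fuel : Nat) (c : Int)
    (s : Int × Int × List Int × List Int) :
    pvG maze n m f3 f4 (fuel + 1) c s =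
      if s.1 = f3 ∧ s.2.1 = f4 then [c]
      else (pvExpandB maze n m f3 f4 s.1 s.2.1 s.2.2.1 s.2.2.2).flatMap
        (pvG maze n m f3 f4 fuel (c + 1)) := rfl

-- G with ample fuel unfolds to G with ample fuel on the children
theorem pvG_big_unfold (maze : List (List Int)) (n m f3 f4 : Int) (c : Int)
    (s : Int × Int × List Int × List Int) (hwf : pvWf n m s) (hgl : ¬(s.1 = f3 ∧ s.2.1 = f4)) :
    pvG maze n m f3 f4 (2 * (n * m).toNat + 4) c s =
      (pvExpandB maze n m f3 f4 s.1 s.2.1 s.2.2.1 s.2.2.2).flatMap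
        (pvG maze n m f3 f4 (2 * (n * m).toNat + 4) (c + 1)) := by
  rw [show 2 * (n * m).toNat + 4 = (2 * (n * m).toNat + 3) + 1 from rfl, pvG_succ, if_neg hgl]
  apply pvFlatMap_congr
  intro t ht
  obtain ⟨hwt, hct⟩ := pvExpandB_facts maze n m f3 f4 s hwf hgl t ht
  have h1 := pvWf_card_le n m s hwf
  exact pvG_fuel maze n m f3 f4 _ _ (c + 1) t hwt (by omega) (by omega)

theorem pvPairwise_triv {α : Type} (R : α → α → Prop) (h : ∀ a b, R a b) :
    ∀ (l : List α), l.Pairwise R := by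
  intro l
  induction l with
  | nil => exact List.Pairwise.nil
  | cons x l ih => exact List.Pairwise.cons (fun b _ => h x b) ih

def pvPhi (K : Nat) (q : List (Int × Int × Int × List Int × List Int)) : Nat :=
  (q.map (fun t => 17 ^ (2 * K + 3 - pvCard t.2))).sum

theorem pvBridge (maze : List (List Int)) (n m f3 f4 : Int) :
    ∀ (fuel : Nat) (q : List (Int × Int × Int × List Int × List Int)),
      (∀ t ∈ q, pvWf n m t.2) →
      q.Pairwise (fun x y => x.1 ≤ y.1 ∧ y.1 ≤ x.1 + 1) →
      pvPhi (n * m).toNat q + 1 ≤ fuel →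
      solutionGo maze n m f3 f4 fuel q =
        (pvMfold none (q.flatMap
          (fun t => pvG maze n m f3 f4 (2 * (n * m).toNat + 4) t.1 t.2))).getD 0 := by
  intro fuel
  induction fuel using Nat.strong_induction_on with
  | _ fuel ih =>
  intro q hwf hpw hfuel
  obtain ⟨f, rfl⟩ : ∃ f, fuel = f + 1 := ⟨fuel - 1, by omega⟩
  match q with
  | [] => rfl
  | (c, red, blue, rv, bv) :: rest =>
    have hwfs : pvWf n m (red, blue, rv, bv) := hwf (c, red, blue, rv, bv) (by simp)
    rw [solutionGo_cons]
    by_cases hgl : red = f3 ∧ blue = f4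
    · rw [if_pos hgl]
      rw [List.flatMap_cons,
        show (2 * (n * m).toNat + 4) = (2 * (n * m).toNat + 3) + 1 from rfl, pvG_succ,
        if_pos (show ((red : Int), blue, rv, bv).1 = f3 ∧ ((red : Int), blue, rv, bv).2.1 = f4
          from hgl)]
      rw [show ([c] ++ List.flatMap
          (fun t => pvG maze n m f3 f4 (2 * (n * m).toNat + 3 + 1) t.1 t.2) rest) =
          (c :: List.flatMap
          (fun t => pvG maze n m f3 f4 (2 * (n * m).toNat + 3 + 1) t.1 t.2) rest) from rfl,
        pvMfold_cons]
      have hlow : ∀ w ∈ List.flatMap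
          (fun t => pvG maze n m f3 f4 (2 * (n * m).toNat + 3 + 1) t.1 t.2) rest, c ≤ w := by
        intro w hw
        rw [List.mem_flatMap] at hw
        obtain ⟨t, htmem, hw⟩ := hw
        have h1 := pvG_lb maze n m f3 f4 _ t.1 t.2 w hw
        have h2 : c ≤ t.1 := ((List.pairwise_cons.1 hpw).1 t htmem).1
        omega
      rw [show pvOmin none (some c) = some c from rfl]
      rw [pvMfold_of_le _ c hlow]
      rfl
    · rw [if_neg hgl]
      have hF := pvExpandA_rel_self maze n m f3 f4 (red, blue, rv, bv) hwfs hgl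
      have hchild : ∀ a ∈ pvExpandA maze n m f3 f4 red blue rv bv,
          pvWf n m a ∧ pvCard (red, blue, rv, bv) + 1 ≤ pvCard a := by
        intro a ha
        obtain ⟨b, _, hr⟩ := pvForall2_mem_left hF a ha
        exact ⟨hr.2.1, hr.2.2.2⟩
      have hcard := pvWf_card_le n m _ hwfs
      have hlen : (pvExpandA maze n m f3 f4 red blue rv bv).length ≤ 16 := by
        rw [List.Forall₂.length_eq hF]
        exact pvExpandB_len maze n m f3 f4 red blue rv bv
      -- the potential strictly decreases
      have hphi : pvPhi (n * m).toNat
          (rest ++ (pvExpandA maze n m f3 f4 red blue rv bv).map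
            (fun t => (c + 1, t.1, t.2.1, t.2.2.1, t.2.2.2))) + 1 ≤
          pvPhi (n * m).toNat ((c, red, blue, rv, bv) :: rest) := by
        unfold pvPhi
        rw [List.map_append, List.sum_append, List.map_cons, List.sum_cons, List.map_map]
        have hsum : ((pvExpandA maze n m f3 f4 red blue rv bv).map
            ((fun t => 17 ^ (2 * (n * m).toNat + 3 - pvCard t.2)) ∘
              (fun t => ((c + 1 : Int), t.1, t.2.1, t.2.2.1, t.2.2.2)))).sum ≤
            16 * 17 ^ (2 * (n * m).toNat + 2 - pvCard (red, blue, rv, bv)) := by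
          have hbound : ∀ x ∈ (pvExpandA maze n m f3 f4 red blue rv bv).map
              ((fun t => 17 ^ (2 * (n * m).toNat + 3 - pvCard t.2)) ∘
                (fun t => ((c + 1 : Int), t.1, t.2.1, t.2.2.1, t.2.2.2))),
              x ≤ 17 ^ (2 * (n * m).toNat + 2 - pvCard (red, blue, rv, bv)) := by
            intro x hx
            rw [List.mem_map] at hx
            obtain ⟨a, ha, rfl⟩ := hx
            obtain ⟨_, hca⟩ := hchild a ha
            apply Nat.pow_le_pow_right (by omega)
            show 2 * (n * m).toNat + 3 - pvCard a ≤
              2 * (n * m).toNat + 2 - pvCard (red, blue, rv, bv)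
            omega
          calc ((pvExpandA maze n m f3 f4 red blue rv bv).map _).sum ≤
              ((pvExpandA maze n m f3 f4 red blue rv bv).map _).length •
                17 ^ (2 * (n * m).toNat + 2 - pvCard (red, blue, rv, bv)) :=
              List.sum_le_card_nsmul _ _ hbound
            _ ≤ 16 * 17 ^ (2 * (n * m).toNat + 2 - pvCard (red, blue, rv, bv)) := by
              rw [List.length_map, smul_eq_mul]
              exact Nat.mul_le_mul_right _ hlen
        have hpow : 16 * 17 ^ (2 * (n * m).toNat + 2 - pvCard (red, blue, rv, bv)) + 1 ≤
            17 ^ (2 * (n * m).toNat + 3 - pvCard (red, blue, rv, bv)) := by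
          have he : 2 * (n * m).toNat + 3 - pvCard (red, blue, rv, bv) =
              (2 * (n * m).toNat + 2 - pvCard (red, blue, rv, bv)) + 1 := by omega
          rw [he, Nat.pow_succ]
          have : 1 ≤ 17 ^ (2 * (n * m).toNat + 2 - pvCard (red, blue, rv, bv)) :=
            Nat.one_le_pow _ _ (by omega)
          omega
        have hproj : pvCard ((c : Int), red, blue, rv, bv).2 = pvCard (red, blue, rv, bv) := rfl
        rw [hproj]
        omega
      have hwfq' : ∀ t ∈ rest ++ (pvExpandA maze n m f3 f4 red blue rv bv).map
          (fun t => ((c + 1 : Int), t.1, t.2.1, t.2.2.1, t.2.2.2)), pvWf n m t.2 := by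
        intro t ht
        rw [List.mem_append] at ht
        rcases ht with ht | ht
        · exact hwf t (by simp [ht])
        · rw [List.mem_map] at ht
          obtain ⟨a, ha, rfl⟩ := ht
          exact (hchild a ha).1
      have hpwq' : List.Pairwise (fun x y => x.1 ≤ y.1 ∧ y.1 ≤ x.1 + 1)
          (rest ++ (pvExpandA maze n m f3 f4 red blue rv bv).map
            (fun t => ((c + 1 : Int), t.1, t.2.1, t.2.2.1, t.2.2.2))) := by
        rw [List.pairwise_append]
        refine ⟨(List.pairwise_cons.1 hpw).2, ?_, ?_⟩
        · rw [List.pairwise_map]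
          exact pvPairwise_triv _ (fun a b => ⟨le_refl _, by omega⟩) _
        · intro x hx y hy
          rw [List.mem_map] at hy
          obtain ⟨a, _, rfl⟩ := hy
          have := (List.pairwise_cons.1 hpw).1 x hx
          exact ⟨by omega, by omega⟩
      rw [ih f (by omega) _ hwfq' hpwq' (by omega)]
      · -- identify the two minimisations
        rw [List.flatMap_append, List.flatMap_cons]
        have hmap : List.flatMap (fun t => pvG maze n m f3 f4 (2 * (n * m).toNat + 4) t.1 t.2)
            ((pvExpandA maze n m f3 f4 red blue rv bv).map
              (fun t => ((c + 1 : Int), t.1, t.2.1, t.2.2.1, t.2.2.2))) =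
            (pvExpandA maze n m f3 f4 red blue rv bv).flatMap
              (pvG maze n m f3 f4 (2 * (n * m).toNat + 4) (c + 1)) := by
          rw [List.flatMap_map]
        rw [hmap]
        have hG : pvG maze n m f3 f4 (2 * (n * m).toNat + 4) c (red, blue, rv, bv) =
            (pvExpandA maze n m f3 f4 red blue rv bv).flatMap
              (pvG maze n m f3 f4 (2 * (n * m).toNat + 4) (c + 1)) := by
          rw [pvG_big_unfold maze n m f3 f4 c _ hwfs hgl]
          exact (pvForall2_flatMap_eq hF _ _
            (fun a b hab => pvG_congr maze n m f3 f4 _ (c + 1) a b hab.2.1 hab.2.2.1 hab.1)).symm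
        rw [hG, pvMfold_append, pvMfold_append, pvOmin_comm]

theorem pvDfs_eq (maze : List (List Int)) (n m f3 f4 : Int) :
    ∀ (fuel : Nat) (c : Int) (s : Int × Int × List Int × List Int) (best : Option Int),
      pvWf n m s → 2 * (n * m).toNat + 2 - pvCard s ≤ fuel →
      solutionAltGo maze n m f3 f4 fuel s.1 s.2.1 s.2.2.1 s.2.2.2 c best =
        pvOmin best (pvMfold none (pvG maze n m f3 f4 (2 * (n * m).toNat + 4) c s)) := by
  intro fuel
  induction fuel with
  | zero =>
    intro c s best hwf hfl
    have := pvWf_card_le n m s hwf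
    omega
  | succ fuel ih =>
    intro c s best hwf hfl
    obtain ⟨red, blue, rv, bv⟩ := s
    rw [solutionAltGo_cons]
    by_cases hp : (match best with | some v => decide (v ≤ c) | none => false) = true
    · rw [if_pos hp]
      cases best with
      | none => simp at hp
      | some v =>
        have hv : v ≤ c := of_decide_eq_true hp
        cases hM : pvMfold none (pvG maze n m f3 f4 (2 * (n * m).toNat + 4) c
            (red, blue, rv, bv)) with
        | none => rfl
        | some w =>
          have hw : w ∈ pvG maze n m f3 f4 (2 * (n * m).toNat + 4) c (red, blue, rv, bv) := by
            rcases pvMfold_mem _ _ _ hM with h | h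
            · cases h
            · exact h
          have := pvG_lb maze n m f3 f4 _ c _ w hw
          simp [pvOmin, min_eq_left (by omega : v ≤ w)]
    · rw [if_neg hp]
      by_cases hgl : red = f3 ∧ blue = f4
      · rw [if_pos hgl,
          show 2 * (n * m).toNat + 4 = (2 * (n * m).toNat + 3) + 1 from rfl, pvG_succ,
          if_pos (show ((red : Int), blue, rv, bv).1 = f3 ∧ ((red : Int), blue, rv, bv).2.1 = f4
            from hgl)]
        cases best with
        | none => rfl
        | some v =>
          have hv : ¬ v ≤ c := by
            intro h
            exact hp (by simp [h])
          show some c = pvOmin (some v) (pvMfold none [c])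
          rw [show pvMfold none [c] = some c from rfl]
          simp [pvOmin, min_eq_right (by omega : c ≤ v)]
      · rw [if_neg hgl]
        have hcard := pvWf_card_le n m _ hwf
        have hstep : ∀ (l : List (Int × Int × List Int × List Int)),
            (∀ t ∈ l, pvWf n m t ∧ pvCard (red, blue, rv, bv) + 1 ≤ pvCard t) →
            ∀ b, l.foldl (fun b t =>
                solutionAltGo maze n m f3 f4 fuel t.1 t.2.1 t.2.2.1 t.2.2.2 (c + 1) b) b =
              pvOmin b (pvMfold none
                (l.flatMap (pvG maze n m f3 f4 (2 * (n * m).toNat + 4) (c + 1)))) := by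
          intro l
          induction l with
          | nil => intro _ b; exact (pvOmin_none_right b).symm
          | cons t l ihl =>
            intro hl b
            rw [List.foldl_cons,
              ih (c + 1) t b (hl t (by simp)).1 (by have := (hl t (by simp)).2; omega),
              ihl (fun t' ht' => hl t' (by simp [ht'])), List.flatMap_cons,
              pvMfold_append, ← pvOmin_assoc]
        rw [hstep _ (pvExpandC_facts maze n m f3 f4 (red, blue, rv, bv) hwf hgl) best,
          pvG_big_unfold maze n m f3 f4 c _ hwf hgl]
        exact congrArg (pvOmin best) (pvMfold_eq_of_mem_iff _ _
          (pvFlatMap_mem_iff _ _ _ (pvMemExpandC maze n m f3 f4 red blue rv bv)))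

-- ---------- flags facts ----------

theorem pvMem_pySetD (l : List Int) (i v x : Int) (h : x ∈ PySem.List.pySetD l i v) :
    x ∈ l ∨ x = v := by
  unfold PySem.List.pySetD PySem.List.pySet? at h
  cases hk : PySem.List.pyIdx? l.length i with
  | none => rw [hk] at h; simp at h; exact Or.inl h
  | some k =>
    rw [hk] at h; simp at h
    rcases List.mem_or_eq_of_mem_set h with h' | h'
    · exact Or.inl h'
    · exact Or.inr h'

theorem pvFoldl_inv {σ α : Type} (P : σ → Prop) (f : σ → α → σ) :
    ∀ (l : List α) (init : σ), P init → (∀ s a, a ∈ l → P s → P (f s a)) →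
      P (l.foldl f init) := by
  intro l
  induction l with
  | nil => intro init h _; exact h
  | cons a l ih =>
    intro init h hstep
    exact ih _ (hstep init a (by simp) h) (fun s b hb hs => hstep s b (by simp [hb]) hs)

theorem pvGetD_prop (P : Int → Prop) (l : List Int) (i : Int) (d : Int)
    (h : ∀ x ∈ l, P x) (hd : P d) : P (PySem.List.pyGetD l i d) := by
  unfold PySem.List.pyGetD PySem.List.pyGet?
  cases hk : PySem.List.pyIdx? l.length i with
  | none => exact hd
  | some k =>
    simp only [Option.bind_some]
    cases hg : l[k]? with
    | none => exact hd
    | some x =>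
      simp only [Option.getD_some]
      exact h x (List.mem_of_getElem? hg)

theorem pvFlags_range (maze : List (List Int)) (n m : Int) (hnm : 0 < n * m) (_hm : 0 ≤ m)
    (_hn : 0 ≤ n) :
    ∀ x ∈ solutionFlags maze n m, 0 ≤ x ∧ x < n * m := by
  unfold solutionFlags
  apply pvFoldl_inv (fun fl => ∀ x ∈ fl, 0 ≤ x ∧ x < n * m)
  · intro x hx
    simp at hx
    subst hx
    omega
  · intro fl i hi hfl
    have hib := PySem.List.mem_pyRange_one.1 hi
    apply pvFoldl_inv (fun fl => ∀ x ∈ fl, 0 ≤ x ∧ x < n * m)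
    · exact hfl
    · intro fl2 j hj hfl2
      have hjb := PySem.List.mem_pyRange_one.1 hj
      intro x hx
      rcases pvMem_pySetD _ _ _ _ hx with h | rfl
      · exact hfl2 x h
      · exact pvCell_range n m i j (by omega)

theorem pvFlags_m0 (maze : List (List Int)) (n : Int) :
    solutionFlags maze n 0 = [0, 0, 0, 0, 0, 0] := by
  unfold solutionFlags
  rw [PySem.List.pyRange_one_eq_nil (le_refl (0 : Int))]
  simp only [List.foldl_nil]
  apply pvFoldl_inv (fun fl => fl = [0, 0, 0, 0, 0, 0])
  · rfl
  · intro s a _ h; exact h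

-- ---------- assembling the two wrappers ----------

theorem pvCard_init (f1 f2 : Int) : pvCard (f1, f2, [f1], [f2]) = 2 := by
  simp [pvCard]

theorem pvMainPos (maze : List (List Int)) (n m f1 f2 f3 f4 : Int) (FA FB : Nat)
    (h1 : 0 ≤ f1 ∧ f1 < n * m) (h2 : 0 ≤ f2 ∧ f2 < n * m)
    (hFA : pvPhi (n * m).toNat [((0 : Int), f1, f2, [f1], [f2])] + 1 ≤ FA)
    (hFB : 2 * (n * m).toNat ≤ FB) :
    solutionGo maze n m f3 f4 FA [(0, f1, f2, [f1], [f2])] =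
      (solutionAltGo maze n m f3 f4 FB f1 f2 [f1] [f2] 0 none).getD 0 := by
  have hwf0 : pvWf n m (f1, f2, [f1], [f2]) := by
    refine ⟨by simp, by simp, by simp, by simp, ?_, ?_⟩
    · intro x hx; simp at hx; subst hx; exact h1
    · intro x hx; simp at hx; subst hx; exact h2
  have hb := pvBridge maze n m f3 f4 FA [(0, f1, f2, [f1], [f2])]
    (by intro t ht; simp at ht; subst ht; exact hwf0)
    (by exact List.pairwise_singleton _ _) hFA
  have hd := pvDfs_eq maze n m f3 f4 FB 0 (f1, f2, [f1], [f2]) none hwf0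
    (by rw [pvCard_init]; omega)
  simp only at hd
  rw [hb, hd]
  simp [pvOmin]
theorem pvNatCast_toNat (a b : Nat) : (((a : Int)) * ((b : Int))).toNat = a * b := by
  rw [← Nat.cast_mul, Int.toNat_natCast]

-- ===== VERDICT (by name: the statement is the Claim_ definition above) =====
theorem solution_spec : Claim_equal_solution := by
  unfold Claim_equal_solution Spec_solution
  intro maze _ hpre
  obtain ⟨hne, _⟩ := hpre
  simp only [solution, solution_alt]
  rcases Nat.eq_zero_or_pos (PySem.List.pyGetD maze 0 []).length with hm0 | hm0
  · simp only [hm0, Nat.cast_zero, Nat.mul_zero]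
    rw [pvFlags_m0]
    have e1 : PySem.List.pyGetD [(0 : Int), 0, 0, 0, 0, 0] 1 0 = 0 := by decide
    have e2 : PySem.List.pyGetD [(0 : Int), 0, 0, 0, 0, 0] 2 0 = 0 := by decide
    have e3 : PySem.List.pyGetD [(0 : Int), 0, 0, 0, 0, 0] 3 0 = 0 := by decide
    have e4 : PySem.List.pyGetD [(0 : Int), 0, 0, 0, 0, 0] 4 0 = 0 := by decide
    rw [e1, e2, e3, e4]
    have hA : (17 : Nat) ^ (0 + 8) = (17 ^ 8 - 1) + 1 := by norm_num
    rw [hA, solutionGo_cons, if_pos ⟨rfl, rfl⟩]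
    rw [show (0 + 8 : Nat) = 7 + 1 from rfl, solutionAltGo_cons]
    rw [if_neg (by simp), if_pos ⟨rfl, rfl⟩]
    rfl
  · have hlen : 1 ≤ maze.length := by
      cases maze with
      | nil => exact absurd rfl hne
      | cons a t => simp
    have hn1 : (1 : Int) ≤ (maze.length : Int) := by exact_mod_cast hlen
    have hm1 : (1 : Int) ≤ ((PySem.List.pyGetD maze 0 []).length : Int) := by
      exact_mod_cast hm0
    have hnm : 0 < (maze.length : Int) * ((PySem.List.pyGetD maze 0 []).length : Int) :=
      mul_pos (by omega) (by omega)
    have hfl := pvFlags_range maze (maze.length : Int)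
      ((PySem.List.pyGetD maze 0 []).length : Int) hnm (by omega) (by omega)
    have hP0 : (0 : Int) ≤ 0 ∧ (0 : Int) <
        (maze.length : Int) * ((PySem.List.pyGetD maze 0 []).length : Int) := ⟨le_refl 0, hnm⟩
    have hcast := pvNatCast_toNat maze.length (PySem.List.pyGetD maze 0 []).length
    apply pvMainPos maze _ _ _ _ _ _ _ _
      (pvGetD_prop _ _ 1 0 hfl hP0) (pvGetD_prop _ _ 2 0 hfl hP0)
    · simp only [pvPhi, List.map_cons, List.map_nil, List.sum_cons, List.sum_nil, pvCard_init]
      rw [hcast]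
      have hlt := Nat.pow_lt_pow_right (by norm_num : (1 : Nat) < 17)
        (show 2 * (maze.length * (PySem.List.pyGetD maze 0 []).length) + 3 - 2 <
          2 * maze.length * (PySem.List.pyGetD maze 0 []).length + 8 by
            have : 2 * maze.length * (PySem.List.pyGetD maze 0 []).length =
              2 * (maze.length * (PySem.List.pyGetD maze 0 []).length) := by ring
            omega)
      omega
    · rw [hcast]
      have : 2 * maze.length * (PySem.List.pyGetD maze 0 []).length =
        2 * (maze.length * (PySem.List.pyGetD maze 0 []).length) := by ring
      omega
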